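-- pv_equiv track=rewrite | github.com/yangjung-woo/KT-Workspace | KT_coding_masters/무인도.py | solution
-- ===== SOURCE A (Python) =====
-- from collections import deque
--
-- def BFS(y,x,maps,visited):
--     dy = [0,1,0,-1]
--     dx = [1,0,-1,0]
--     maxY = len(maps)
--     maxX = len(maps[0])
--     queue = deque()
--     queue.append((y,x))
--     visited[y][x] = True
--     volumn = int(maps[y][x])
--
--     while queue:
--         now_y , now_x = queue.popleft()
--         for i in range(4):
--             ny = dy[i] +now_y
--             nx = dx[i] +now_x
--             if 0<=ny<maxY and 0<=nx<maxX and maps[ny][nx] != 'X' and visited[ny][nx] ==False: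
--                 queue.append((ny,nx))
--                 visited[ny][nx] = True
--                 volumn += int(maps[ny][nx])
--     return volumn
--
-- def solution(maps):
--     answer = []
--
--     visited = [[False] * len(maps[0])  for _ in range(len(maps))]
--
--     for i in range(len(maps)):
--         for j in range(len(maps[0])):
--             if visited[i][j] == False and maps[i][j] != 'X':
--                 answer.append(BFS(i,j,maps,visited))
--
--     if answer:
--         return sorted(answer)
--     else:
--         return[-1]
-- ===== SOURCE B (Python) =====
-- def solution(maps):
--     h, w = len(maps), len(maps[0])
--     n = h * w
--     parent = list(range(n))
--
--     def find(x):
--         while parent[x] != x: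
--             x = parent[x]
--         return x
--
--     def union(a, b):
--         ra, rb = find(a), find(b)
--         if ra != rb:
--             parent[max(ra, rb)] = min(ra, rb)
--
--     for i in range(h):
--         for j in range(w):
--             if maps[i][j] == 'X':
--                 continue
--             k = i * w + j
--             if j + 1 < w and maps[i][j + 1] != 'X':
--                 union(k, k + 1)
--             if i + 1 < h and maps[i + 1][j] != 'X':
--                 union(k, k + w)
--
--     sums = {}
--     for i in range(h):
--         for j in range(w):
--             if maps[i][j] != 'X':
--                 r = find(i * w + j)
--                 sums[r] = sums.get(r, 0) + int(maps[i][j])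
--
--     vals = list(sums.values())
--     return sorted(vals) if vals else [-1]
-- ===== Notes on version B (the rewrite author's own statement) =====
-- stated objective: alternative
-- what changed: Replaces A's per-seed BFS flood fill over a visited matrix by a union-find (disjoint-set forest indexed by i*w+j, larger root linked under smaller): one pass unions each non-X cell with its right/down non-X neighbours, a second pass accumulates each cell's digit into a dict keyed by its root, and the dict's values are sorted.
-- outside the precondition, e.g. on solution([]): A returns [-1], B raises IndexError
import Mathlib
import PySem

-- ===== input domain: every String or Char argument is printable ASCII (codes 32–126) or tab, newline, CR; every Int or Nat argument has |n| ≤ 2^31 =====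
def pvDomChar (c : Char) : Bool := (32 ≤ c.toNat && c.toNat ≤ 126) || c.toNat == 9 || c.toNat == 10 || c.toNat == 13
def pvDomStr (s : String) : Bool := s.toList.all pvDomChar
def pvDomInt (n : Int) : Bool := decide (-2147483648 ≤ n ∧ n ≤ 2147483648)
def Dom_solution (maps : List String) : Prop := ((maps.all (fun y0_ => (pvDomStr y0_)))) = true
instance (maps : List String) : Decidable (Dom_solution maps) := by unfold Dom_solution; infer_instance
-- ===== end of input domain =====

-- B replaces A's per-seed BFS flood fill (deque + visited boolean matrix) by a union-find
-- (disjoint-set forest over flat indices i*w+j, larger root linked under smaller): one pass unions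
-- right/down non-X neighbours, a second pass groups each cell's digit into a dict keyed by its root
-- (objective: alternative; a different data structure, order-independence of the region sums is proved).


-- ===== PORT A =====
-- shared low-level primitives (exact transliterations of the Python subscripts they stand for)
-- maps[y][x] (a 1-character string, read as a Char; in-range under Pre_)
def chAt (maps : List String) (y x : Int) : Char :=
  PySem.List.pyGetD (PySem.List.pyGetD maps y "").toList x ' '
-- int(maps[y][x]) (exact under Pre_, which makes the char a digit)
def valAt (maps : List String) (y x : Int) : Int :=
  (PySem.Int.ofChars? [chAt maps y x]).getD 0
-- visited[c0][c1] (True where Python would read True or the index is out of the matrix)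
def mkA (v : List (List Bool)) (c : Int × Int) : Bool :=
  PySem.List.pyGetD (PySem.List.pyGetD v c.1 []) c.2 true
-- visited[c0][c1] = True
def markA (v : List (List Bool)) (c : Int × Int) : List (List Bool) :=
  PySem.List.pySetD v c.1 (PySem.List.pySetD (PySem.List.pyGetD v c.1 []) c.2 true)

-- body of A's `for i in range(4)` at one i: test the neighbour, enqueue+mark+add if it passes
def stepA (maps : List String) (maxY maxX : Int)
    (s : List (Int × Int) × List (List Bool) × Int) (d : Int × Int) :
    List (Int × Int) × List (List Bool) × Int :=
  if 0 ≤ d.1 ∧ d.1 < maxY ∧ 0 ≤ d.2 ∧ d.2 < maxX ∧ chAt maps d.1 d.2 ≠ 'X' ∧ mkA s.2.1 d = false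
  then (s.1 ++ [d], markA s.2.1 d, s.2.2 + valAt maps d.1 d.2)
  else s

def bfsVisit (maps : List String) (maxY maxX : Int) (now : Int × Int)
    (s : List (Int × Int) × List (List Bool) × Int) (i : Int) :
    List (Int × Int) × List (List Bool) × Int :=
  stepA maps maxY maxX s
    (PySem.List.pyGetD ([0, 1, 0, -1] : List Int) i 0 + now.1,
     PySem.List.pyGetD ([1, 0, -1, 0] : List Int) i 0 + now.2)

-- number of False entries of the visited matrix (termination measure only)
def cntF (v : List (List Bool)) : Nat := (v.map (fun r => r.count false)).sum

theorem sum_set_nat (l : List Nat) (n : Nat) (x : Nat) (h : n < l.length) :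
    (l.set n x).sum + l[n] = l.sum + x := by
  induction l generalizing n with
  | nil => simp at h
  | cons a t ih =>
    cases n with
    | zero => simp [List.set]; omega
    | succ m =>
      simp only [List.set, List.sum_cons, List.getElem_cons_succ]
      have := ih m (by simpa using h)
      omega

theorem count_false_set (r : List Bool) (j : Nat) (hj : j < r.length) (hf : r[j] = false) :
    (r.set j true).count false + 1 = r.count false := by
  induction r generalizing j with
  | nil => simp at hj
  | cons a t ih =>
    cases j with
    | zero => simp_all
    | succ m =>
      simp only [List.set, List.count_cons]
      have := ih m (by simpa using hj) (by simpa using hf)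
      omega

-- reading False through mkA pins both indices inside the matrix
theorem mkA_false_elim (v : List (List Bool)) (d : Int × Int)
    (hd : mkA v d = false) (h1 : 0 ≤ d.1) (h2 : 0 ≤ d.2) :
    ∃ (hy : d.1.toNat < v.length), ∃ (hx : d.2.toNat < (v[d.1.toNat]).length),
      v[d.1.toNat][d.2.toNat] = false := by
  unfold mkA at hd
  rw [PySem.List.pyGetD_of_nonneg _ _ h1, PySem.List.pyGetD_of_nonneg _ _ h2] at hd
  by_cases hy : d.1.toNat < v.length
  · rw [List.getD_eq_getElem v [] hy] at hd
    by_cases hx : d.2.toNat < (v[d.1.toNat]).length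
    · rw [List.getD_eq_getElem _ true hx] at hd
      exact ⟨hy, hx, hd⟩
    · rw [List.getD_eq_default _ true (by omega)] at hd
      simp at hd
  · rw [List.getD_eq_default v [] (by omega)] at hd
    simp at hd

theorem markA_eq (v : List (List Bool)) (d : Int × Int)
    (h1 : 0 ≤ d.1) (h2 : 0 ≤ d.2) (hy : d.1.toNat < v.length) :
    markA v d = v.set d.1.toNat ((v[d.1.toNat]).set d.2.toNat true) := by
  unfold markA
  rw [PySem.List.pySetD_of_nonneg _ _ h1, PySem.List.pySetD_of_nonneg _ _ h2,
    PySem.List.pyGetD_of_nonneg _ _ h1, List.getD_eq_getElem?_getD,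
    List.getElem?_eq_getElem hy]
  rfl

theorem cntF_mark (v : List (List Bool)) (d : Int × Int)
    (hd : mkA v d = false) (h1 : 0 ≤ d.1) (h2 : 0 ≤ d.2) :
    cntF (markA v d) + 1 = cntF v := by
  obtain ⟨hy, hx, hf⟩ := mkA_false_elim v d hd h1 h2
  rw [markA_eq v d h1 h2 hy]
  unfold cntF
  rw [List.map_set]
  have hs := sum_set_nat (v.map (fun r => r.count false)) d.1.toNat
      (((v[d.1.toNat]).set d.2.toNat true).count false) (by simpa using hy)
  rw [List.getElem_map] at hs
  have hc := count_false_set (v[d.1.toNat]) d.2.toNat hx hf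
  omega

def muA (s : List (Int × Int) × List (List Bool) × Int) : Nat := 2 * cntF s.2.1 + s.1.length

theorem stepA_mu (maps : List String) (maxY maxX : Int)
    (s : List (Int × Int) × List (List Bool) × Int) (d : Int × Int) :
    muA (stepA maps maxY maxX s d) ≤ muA s := by
  unfold stepA
  split
  · next h =>
    obtain ⟨h1, _, h2, _, _, hmk⟩ := h
    have := cntF_mark s.2.1 d hmk h1 h2
    simp only [muA, List.length_append, List.length_cons, List.length_nil]
    omega
  · exact le_refl _

theorem foldl_mu_le {σ α : Type} (μ : σ → Nat) (f : σ → α → σ)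
    (h : ∀ s x, μ (f s x) ≤ μ s) : ∀ (l : List α) (s : σ), μ (l.foldl f s) ≤ μ s := by
  intro l
  induction l with
  | nil => intro s; simp
  | cons a t ih => intro s; exact le_trans (ih (f s a)) (h s a)

def bfsLoop (maps : List String) (maxY maxX : Int) (queue : List (Int × Int))
    (visited : List (List Bool)) (volumn : Int) : List (List Bool) × Int :=
  match queue with
  | [] => (visited, volumn)
  | now :: rest =>
    let s := (PySem.List.pyRange 0 4).foldl (bfsVisit maps maxY maxX now) (rest, visited, volumn)
    bfsLoop maps maxY maxX s.1 s.2.1 s.2.2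
termination_by 2 * cntF visited + queue.length
decreasing_by
  have h := foldl_mu_le muA (bfsVisit maps maxY maxX now)
    (fun s i => stepA_mu maps maxY maxX s _) (PySem.List.pyRange 0 4) (rest, visited, volumn)
  simp only [muA] at h
  simp only [List.length_cons]
  omega

def BFS (y x : Int) (maps : List String) (visited : List (List Bool)) :
    List (List Bool) × Int :=
  let maxY : Int := (maps.length : Int)
  let maxX : Int := PySem.Str.len (PySem.List.pyGetD maps 0 "")
  bfsLoop maps maxY maxX [(y, x)] (markA visited (y, x)) (valAt maps y x)

def solution (maps : List String) : List Int :=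
  let visited0 : List (List Bool) :=
    (PySem.List.pyRange 0 (maps.length : Int)).map
      (fun _ => PySem.List.pyRepeat [false] (PySem.Str.len (PySem.List.pyGetD maps 0 "")))
  let st := (PySem.List.pyRange 0 (maps.length : Int)).foldl
    (fun (st : List (List Bool) × List Int) i =>
      (PySem.List.pyRange 0 (PySem.Str.len (PySem.List.pyGetD maps 0 ""))).foldl
        (fun (st : List (List Bool) × List Int) j =>
          if mkA st.1 (i, j) = false ∧ chAt maps i j ≠ 'X'
          then
            let r := BFS i j maps st.1
            (r.1, st.2 ++ [r.2])
          else st) st) (visited0, [])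
  if st.2 ≠ [] then PySem.List.sorted st.2 (fun x => x) else [-1]

-- ===== PORT B =====
-- Source B's `find`: the while-loop `while parent[x] != x: x = parent[x]`.  The fuel argument is only a
-- totality guard (in Python the loop terminates because parent[x] ≤ x strictly decreases off roots;
-- with fuel x+1 the Lean function computes the same fixpoint, proved in rootOf_eq below).
def ufFind (parent : List Int) : Nat → Int → Int
  | 0, x => x
  | f + 1, x =>
    let p := PySem.List.pyGetD parent x x
    if p = x then x else ufFind parent f p

def RootOf (parent : List Int) (x : Int) : Int := ufFind parent (x.toNat + 1) x

-- Source B's `union`: link the larger of the two roots under the smaller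
def unionUF (parent : List Int) (a b : Int) : List Int :=
  let ra := RootOf parent a
  let rb := RootOf parent b
  if ra ≠ rb then PySem.List.pySetD parent (max ra rb) (min ra rb) else parent

def solution_alt (maps : List String) : List Int :=
  let h : Int := (maps.length : Int)
  let w : Int := PySem.Str.len (PySem.List.pyGetD maps 0 "")
  let n : Int := h * w
  let parent0 : List Int := PySem.List.pyRange 0 n
  let parent := (PySem.List.pyRange 0 h).foldl (fun (par : List Int) i =>
    (PySem.List.pyRange 0 w).foldl (fun (par : List Int) j =>
      if chAt maps i j = 'X' then par
      else
        let k := i * w + j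
        let par1 := if j + 1 < w ∧ chAt maps i (j + 1) ≠ 'X' then unionUF par k (k + 1) else par
        if i + 1 < h ∧ chAt maps (i + 1) j ≠ 'X' then unionUF par1 k (k + w) else par1) par) parent0
  let sums := (PySem.List.pyRange 0 h).foldl (fun (d : PySem.Dict Int Int) i =>
    (PySem.List.pyRange 0 w).foldl (fun (d : PySem.Dict Int Int) j =>
      if chAt maps i j ≠ 'X' then
        let r := RootOf parent (i * w + j)
        d.insert r (d.getD r 0 + valAt maps i j)
      else d) d) PySem.Dict.empty
  let vals := sums.values
  if vals ≠ [] then PySem.List.sorted vals (fun x => x) else [-1]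

-- ===== PRECONDITION & SPEC =====
-- Pre_ excludes the inputs where Python A raises — a row shorter than row 0 (IndexError) and any
-- non-'X' character in the scanned window that is not a decimal digit (int() ValueError) — and the
-- empty list, where A happens to return [-1] without ever touching maps[0] but B's natural
-- `len(maps[0])` raises IndexError.
def Pre_solution (maps : List String) : Prop :=
  maps ≠ [] ∧ ∀ s ∈ maps,
    (PySem.Str.len (PySem.List.pyGetD maps 0 "")).toNat ≤ s.toList.length ∧
    ∀ j : Nat, j < (PySem.Str.len (PySem.List.pyGetD maps 0 "")).toNat →
      s.toList.getD j ' ' = 'X' ∨ (s.toList.getD j ' ').isDigit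
instance (maps : List String) : Decidable (Pre_solution maps) := by
  unfold Pre_solution; infer_instance
def pvWitness_solution : List String := (["X1", "23"])

def Spec_solution (maps : List String) (out : List Int) : Prop := out = solution_alt maps
instance (maps : List String) (out : List Int) : Decidable (Spec_solution maps out) := by
  unfold Spec_solution; infer_instance

-- ===== CLAIM (what is proved, stated in full; the proofs are below) =====
def Claim_equal_solution : Prop :=
  ∀ (maps : List String), Dom_solution maps → Pre_solution maps → Spec_solution maps (solution maps)

-- ===== LEMMAS AND PROOFS =====

-- ---------- small List.getD/set helpers ----------
theorem getD_set_ne {α : Type} (l : List α) (i j : Nat) (a d : α) (h : i ≠ j) :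
    (l.set i a).getD j d = l.getD j d := by
  rw [List.getD_eq_getElem?_getD, List.getD_eq_getElem?_getD, List.getElem?_set_ne h]

theorem getD_set_self {α : Type} (l : List α) (i : Nat) (a d : α) (h : i < l.length) :
    (l.set i a).getD i d = a := by
  rw [List.getD_eq_getElem?_getD, List.getElem?_set_self h]; rfl

theorem mkA_markA (v : List (List Bool)) (d e : Int × Int)
    (hd : mkA v d = false) (hd1 : 0 ≤ d.1) (hd2 : 0 ≤ d.2)
    (he1 : 0 ≤ e.1) (he2 : 0 ≤ e.2) :
    mkA (markA v d) e = true ↔ (mkA v e = true ∨ e = d) := by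
  obtain ⟨hy, hx, hf⟩ := mkA_false_elim v d hd hd1 hd2
  rw [markA_eq v d hd1 hd2 hy]
  unfold mkA
  rw [PySem.List.pyGetD_of_nonneg _ _ he1, PySem.List.pyGetD_of_nonneg _ _ he2,
    PySem.List.pyGetD_of_nonneg _ _ he1, PySem.List.pyGetD_of_nonneg _ _ he2]
  by_cases h1 : e.1.toNat = d.1.toNat
  · rw [h1, getD_set_self v d.1.toNat _ [] hy, List.getD_eq_getElem v [] hy]
    by_cases h2 : e.2.toNat = d.2.toNat
    · rw [h2, getD_set_self _ d.2.toNat true true hx]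
      have hed : e = d := by
        have hh1 : e.1 = d.1 := by omega
        have hh2 : e.2 = d.2 := by omega
        exact Prod.ext hh1 hh2
      simp [hed]
    · rw [getD_set_ne _ d.2.toNat e.2.toNat true true (Ne.symm h2)]
      have hne : e ≠ d := fun hh => h2 (by rw [hh])
      simp [hne]
  · rw [getD_set_ne v d.1.toNat e.1.toNat _ [] (Ne.symm h1)]
    have hne : e ≠ d := fun hh => h1 (by rw [hh])
    simp [hne]

-- ---------- the grid: neighbours, eligibility, reachability ----------
-- the four neighbour coordinates of a cell (proof-side only)
def nbrs (c : Int × Int) : List (Int × Int) :=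
  [(c.1 + 1, c.2), (c.1 - 1, c.2), (c.1, c.2 + 1), (c.1, c.2 - 1)]

theorem nbrs_symm {c d : Int × Int} (h : d ∈ nbrs c) : c ∈ nbrs d := by
  simp only [nbrs, List.mem_cons, List.not_mem_nil, or_false, Prod.ext_iff] at h ⊢
  omega

-- eligibility: in bounds and not a wall
def ELc (maps : List String) (mY mX : Int) (c : Int × Int) : Prop :=
  0 ≤ c.1 ∧ c.1 < mY ∧ 0 ≤ c.2 ∧ c.2 < mX ∧ chAt maps c.1 c.2 ≠ 'X'

-- the cells of one connected region: reachable from s through eligible, unblocked cells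
inductive Reach (EL : Int × Int → Prop) (bl : Int × Int → Prop) (s : Int × Int) :
    Int × Int → Prop
  | refl : Reach EL bl s s
  | step {c d : Int × Int} : Reach EL bl s c → d ∈ nbrs c → EL d → ¬ bl d → Reach EL bl s d

theorem Reach_trans {EL bl : Int × Int → Prop} {a b c : Int × Int}
    (h1 : Reach EL bl a b) (h2 : Reach EL bl b c) : Reach EL bl a c := by
  induction h2 with
  | refl => exact h1
  | step _ hn he hb ih => exact Reach.step ih hn he hb

theorem Reach_anti {EL bl bl' : Int × Int → Prop} (hb : ∀ x, bl x → bl' x) {a c : Int × Int}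
    (h : Reach EL bl' a c) : Reach EL bl a c := by
  induction h with
  | refl => exact Reach.refl
  | step _ hn he hbl ih => exact Reach.step ih hn he (fun hx => hbl (hb _ hx))

theorem Reach_elig {EL bl : Int × Int → Prop} {a c : Int × Int}
    (h : Reach EL bl a c) : c = a ∨ (EL c ∧ ¬ bl c) := by
  cases h with
  | refl => exact Or.inl rfl
  | step _ hn he hb => exact Or.inr ⟨he, hb⟩

theorem Reach_congr {EL bl bl' : Int × Int → Prop} (hc : ∀ x, EL x → (bl x ↔ bl' x))
    {a c : Int × Int} (h : Reach EL bl a c) : Reach EL bl' a c := by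
  induction h with
  | refl => exact Reach.refl
  | step _ hn he hb ih => exact Reach.step ih hn he (fun hx => hb ((hc _ he).2 hx))

-- a free path can be reversed when the start is eligible
theorem Reach_symm {EL : Int × Int → Prop} {a b : Int × Int} (ha : EL a)
    (h : Reach EL (fun _ => False) a b) : Reach EL (fun _ => False) b a := by
  induction h with
  | refl => exact Reach.refl
  | step hr hn he hb ih =>
    rename_i cmid dnew
    have hc : EL cmid := by
      rcases Reach_elig hr with heq | ⟨h1, _⟩
      · rw [heq]; exact ha
      · exact h1
    exact Reach_trans (Reach.step Reach.refl (nbrs_symm hn) hc not_false) ih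

-- ---------- cell enumeration ----------
def cellsB (h w : Int) : List (Int × Int) :=
  (PySem.List.pyRange 0 h).flatMap (fun i => (PySem.List.pyRange 0 w).map (fun j => (i, j)))

theorem mem_cellsB (h w : Int) (d : Int × Int) :
    d ∈ cellsB h w ↔ (0 ≤ d.1 ∧ d.1 < h ∧ 0 ≤ d.2 ∧ d.2 < w) := by
  unfold cellsB
  rw [List.mem_flatMap]
  constructor
  · rintro ⟨i, hi, hm⟩
    rw [List.mem_map] at hm
    obtain ⟨j, hj, rfl⟩ := hm
    have h1 := PySem.List.mem_pyRange_one.1 hi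
    have h2 := PySem.List.mem_pyRange_one.1 hj
    exact ⟨h1.1, h1.2, h2.1, h2.2⟩
  · rintro ⟨h1, h2, h3, h4⟩
    exact ⟨d.1, PySem.List.mem_pyRange_one.2 ⟨h1, h2⟩,
      List.mem_map.2 ⟨d.2, PySem.List.mem_pyRange_one.2 ⟨h3, h4⟩, rfl⟩⟩

theorem nodup_pyRange_zero (n : Int) : (PySem.List.pyRange 0 n).Nodup := by
  rcases le_or_gt n 0 with h | h
  · have : PySem.List.pyRange 0 n = [] := by
      rw [List.eq_nil_iff_forall_not_mem]
      intro x hx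
      have := PySem.List.mem_pyRange_one.1 hx
      omega
    rw [this]; exact List.nodup_nil
  · have hn : n = ((n.toNat : Nat) : Int) := by omega
    rw [hn, PySem.List.pyRange_zero_natCast]
    exact List.Nodup.map (fun a b hab => by exact_mod_cast hab) List.nodup_range

theorem nodup_cellsB (h w : Int) : (cellsB h w).Nodup := by
  have he : cellsB h w = (PySem.List.pyRange 0 h) ×ˢ (PySem.List.pyRange 0 w) := rfl
  rw [he]
  exact List.Nodup.product (nodup_pyRange_zero h) (nodup_pyRange_zero w)

-- ---------- flat index i*w+j ----------
theorem enc_bounds (h w : Int) (c : Int × Int)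
    (hc : 0 ≤ c.1 ∧ c.1 < h ∧ 0 ≤ c.2 ∧ c.2 < w) :
    0 ≤ c.1 * w + c.2 ∧ c.1 * w + c.2 < h * w := by
  obtain ⟨h1, h2, h3, h4⟩ := hc
  have p1 : 0 ≤ c.1 * w := mul_nonneg h1 (by omega)
  have p2 : (c.1 + 1) * w ≤ h * w := mul_le_mul_of_nonneg_right (by omega) (by omega)
  constructor
  · omega
  · nlinarith

theorem enc_inj (w : Int) (c d : Int × Int)
    (hc : 0 ≤ c.2 ∧ c.2 < w) (hd : 0 ≤ d.2 ∧ d.2 < w)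
    (h : c.1 * w + c.2 = d.1 * w + d.2) : c = d := by
  have h1 : c.1 = d.1 := by
    rcases lt_trichotomy c.1 d.1 with hlt | he | hgt
    · exfalso
      have : (c.1 + 1) * w ≤ d.1 * w := mul_le_mul_of_nonneg_right (by omega) (by omega)
      nlinarith
    · exact he
    · exfalso
      have : (d.1 + 1) * w ≤ c.1 * w := mul_le_mul_of_nonneg_right (by omega) (by omega)
      nlinarith
  have h2 : c.2 = d.2 := by
    rw [h1] at h
    omega
  exact Prod.ext h1 h2

-- ---------- union-find theory ----------
-- the forest invariant Source B maintains: every parent pointer is a smaller-or-equal valid index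
def GoodUF (parent : List Int) : Prop :=
  ∀ (k : Nat) (hk : k < parent.length), 0 ≤ parent[k] ∧ parent[k] ≤ (k : Int)

theorem pyGetD_step (parent : List Int) (hg : GoodUF parent) (x : Int) (hx : 0 ≤ x) :
    PySem.List.pyGetD parent x x = x ∨
    (0 ≤ PySem.List.pyGetD parent x x ∧ PySem.List.pyGetD parent x x < x) := by
  rw [PySem.List.pyGetD_of_nonneg _ _ hx]
  by_cases h : x.toNat < parent.length
  · rw [List.getD_eq_getElem _ _ h]
    have hgk := hg x.toNat h
    rcases eq_or_lt_of_le hgk.2 with he | hl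
    · left; omega
    · right; omega
  · rw [List.getD_eq_default _ _ (by omega)]
    left; rfl

theorem ufFind_fuel (parent : List Int) (hg : GoodUF parent) :
    ∀ (m : Nat) (x : Int) (f : Nat), 0 ≤ x → x.toNat ≤ m → x.toNat < f →
      ufFind parent f x = RootOf parent x := by
  intro m
  induction m with
  | zero =>
    intro x f hx hm hf
    obtain ⟨f', rfl⟩ : ∃ f', f = f' + 1 := ⟨f - 1, by omega⟩
    rcases pyGetD_step parent hg x hx with he | ⟨hp0, hpx⟩
    · simp only [ufFind, RootOf, he, if_pos]
    · omega
  | succ m ih =>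
    intro x f hx hm hf
    obtain ⟨f', rfl⟩ : ∃ f', f = f' + 1 := ⟨f - 1, by omega⟩
    rcases pyGetD_step parent hg x hx with he | ⟨hp0, hpx⟩
    · simp only [ufFind, RootOf, he, if_pos]
    · have hne : PySem.List.pyGetD parent x x ≠ x := by omega
      have hun : ufFind parent (f' + 1) x = ufFind parent f' (PySem.List.pyGetD parent x x) := by
        simp only [ufFind, hne, ite_false]
      have hx1 : (1:Nat) ≤ x.toNat := by omega
      obtain ⟨t, ht⟩ : ∃ t, x.toNat = t + 1 := ⟨x.toNat - 1, by omega⟩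
      have hun2 : RootOf parent x = ufFind parent x.toNat (PySem.List.pyGetD parent x x) := by
        show ufFind parent (x.toNat + 1) x = _
        simp only [ufFind, hne, ite_false]
      rw [hun, hun2,
        ih (PySem.List.pyGetD parent x x) f' hp0 (by omega) (by omega),
        ih (PySem.List.pyGetD parent x x) x.toNat hp0 (by omega) (by omega)]

theorem rootOf_eq (parent : List Int) (hg : GoodUF parent) (x : Int) (hx : 0 ≤ x) :
    RootOf parent x = if PySem.List.pyGetD parent x x = x then x
      else RootOf parent (PySem.List.pyGetD parent x x) := by
  rcases pyGetD_step parent hg x hx with he | ⟨hp0, hpx⟩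
  · rw [if_pos he]
    simp only [RootOf, ufFind, he, if_pos]
  · have hne : PySem.List.pyGetD parent x x ≠ x := by omega
    rw [if_neg hne]
    have hun : RootOf parent x = ufFind parent x.toNat (PySem.List.pyGetD parent x x) := by
      show ufFind parent (x.toNat + 1) x = _
      simp only [ufFind, hne, ite_false]
    rw [hun]
    exact ufFind_fuel parent hg (PySem.List.pyGetD parent x x).toNat _ x.toNat hp0 le_rfl (by omega)

theorem root_props_aux (parent : List Int) (hg : GoodUF parent) :
    ∀ (m : Nat) (x : Int), 0 ≤ x → x.toNat ≤ m →
      PySem.List.pyGetD parent (RootOf parent x) (RootOf parent x) = RootOf parent x ∧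
      0 ≤ RootOf parent x ∧ RootOf parent x ≤ x := by
  intro m
  induction m with
  | zero =>
    intro x hx hm
    rcases pyGetD_step parent hg x hx with he | ⟨hp0, hpx⟩
    · rw [rootOf_eq parent hg x hx, if_pos he]
      exact ⟨he, hx, le_rfl⟩
    · omega
  | succ m ih =>
    intro x hx hm
    rcases pyGetD_step parent hg x hx with he | ⟨hp0, hpx⟩
    · rw [rootOf_eq parent hg x hx, if_pos he]
      exact ⟨he, hx, le_rfl⟩
    · rw [rootOf_eq parent hg x hx, if_neg (by omega)]
      have := ih (PySem.List.pyGetD parent x x) hp0 (by omega)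
      exact ⟨this.1, this.2.1, le_trans this.2.2 (by omega)⟩

theorem rootOf_props (parent : List Int) (hg : GoodUF parent) (x : Int) (hx : 0 ≤ x) :
    PySem.List.pyGetD parent (RootOf parent x) (RootOf parent x) = RootOf parent x ∧
      0 ≤ RootOf parent x ∧ RootOf parent x ≤ x :=
  root_props_aux parent hg x.toNat x hx le_rfl

theorem rootOf_of_fix (parent : List Int) (hg : GoodUF parent) (r : Int) (hr : 0 ≤ r)
    (hfix : PySem.List.pyGetD parent r r = r) : RootOf parent r = r := by
  rw [rootOf_eq parent hg r hr, if_pos hfix]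

theorem goodUF_set (parent : List Int) (hg : GoodUF parent) (M m : Int)
    (hm : 0 ≤ m) (hmM : m < M) :
    GoodUF (parent.set M.toNat m) := by
  intro k hk
  rw [List.length_set] at hk
  by_cases he : k = M.toNat
  · subst he
    rw [List.getElem_set_self (by simpa using hk)]
    exact ⟨hm, by omega⟩
  · rw [List.getElem_set_ne (fun hh => he hh.symm)]
    exact hg k hk

-- the effect of one link parent[M] := m on every root (M, m old roots, m < M)
theorem root_set (parent : List Int) (hg : GoodUF parent) (M m : Int)
    (hm : 0 ≤ m) (hmM : m < M) (hMlen : M.toNat < parent.length)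
    (hMfix : PySem.List.pyGetD parent M M = M) (hmfix : PySem.List.pyGetD parent m m = m) :
    ∀ (q : Nat) (x : Int), 0 ≤ x → x.toNat ≤ q →
      RootOf (parent.set M.toNat m) x = if RootOf parent x = M then m else RootOf parent x := by
  have hg' := goodUF_set parent hg M m hm hmM
  have hM0 : 0 ≤ M := by omega
  have hgetD : ∀ x : Int, 0 ≤ x → PySem.List.pyGetD (parent.set M.toNat m) x x =
      if x = M then m else PySem.List.pyGetD parent x x := by
    intro x hx
    by_cases hxM : x = M
    · subst hxM
      rw [if_pos rfl, PySem.List.pyGetD_of_nonneg _ _ hx, getD_set_self _ _ _ _ hMlen]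
    · rw [if_neg hxM, PySem.List.pyGetD_of_nonneg _ _ hx, PySem.List.pyGetD_of_nonneg _ _ hx,
        getD_set_ne _ _ _ _ _ (by omega)]
  have hmneM : m ≠ M := by omega
  have hrootm' : RootOf (parent.set M.toNat m) m = m := by
    apply rootOf_of_fix _ hg' m hm
    rw [hgetD m hm, if_neg hmneM]
    exact hmfix
  intro q
  induction q with
  | zero =>
    intro x hx hq
    have hxM : x ≠ M := by omega
    have hrx : RootOf parent x = x := by
      rcases pyGetD_step parent hg x hx with he | ⟨hp0, hpx⟩
      · exact rootOf_of_fix parent hg x hx he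
      · omega
    have hrx' : RootOf (parent.set M.toNat m) x = x := by
      apply rootOf_of_fix _ hg' x hx
      rw [hgetD x hx, if_neg hxM]
      rcases pyGetD_step parent hg x hx with he | ⟨hp0, hpx⟩
      · exact he
      · omega
    rw [hrx, hrx', if_neg (by omega)]
  | succ q ih =>
    intro x hx hq
    by_cases hxM : x = M
    · rw [hxM]
      rw [rootOf_of_fix parent hg M hM0 hMfix, if_pos rfl]
      rw [rootOf_eq _ hg' M hM0, hgetD M hM0, if_pos rfl, if_neg hmneM]
      exact hrootm'
    · rcases pyGetD_step parent hg x hx with he | ⟨hp0, hpx⟩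
      · have hrx : RootOf parent x = x := rootOf_of_fix parent hg x hx he
        have hrx' : RootOf (parent.set M.toNat m) x = x := by
          apply rootOf_of_fix _ hg' x hx
          rw [hgetD x hx, if_neg hxM]
          exact he
        rw [hrx, hrx', if_neg hxM]
      · have hstep : RootOf parent x = RootOf parent (PySem.List.pyGetD parent x x) := by
          rw [rootOf_eq parent hg x hx, if_neg (by omega)]
        have hstep' : RootOf (parent.set M.toNat m) x =
            RootOf (parent.set M.toNat m) (PySem.List.pyGetD parent x x) := by
          rw [rootOf_eq _ hg' x hx, hgetD x hx, if_neg hxM, if_neg (by omega)]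
        rw [hstep, hstep', ih (PySem.List.pyGetD parent x x) hp0 (by omega)]

-- the combined effect of Source B's union(a, b)
theorem unionUF_spec (parent : List Int) (hg : GoodUF parent) (a b : Int)
    (ha : 0 ≤ a) (hb : 0 ≤ b) (hal : a.toNat < parent.length) (hbl : b.toNat < parent.length) :
    GoodUF (unionUF parent a b) ∧ (unionUF parent a b).length = parent.length ∧
    (∀ x, 0 ≤ x → RootOf (unionUF parent a b) x =
       if RootOf parent a ≠ RootOf parent b ∧
          RootOf parent x = max (RootOf parent a) (RootOf parent b)
       then min (RootOf parent a) (RootOf parent b) else RootOf parent x) := by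
  obtain ⟨hafix, ha0, haub⟩ := rootOf_props parent hg a ha
  obtain ⟨hbfix, hb0, hbub⟩ := rootOf_props parent hg b hb
  by_cases hne : RootOf parent a ≠ RootOf parent b
  · have hu : unionUF parent a b =
        parent.set (max (RootOf parent a) (RootOf parent b)).toNat
          (min (RootOf parent a) (RootOf parent b)) := by
      unfold unionUF
      rw [if_pos hne, PySem.List.pySetD_of_nonneg _ _ (by simp only [le_max_iff]; omega)]
    have hm0 : 0 ≤ min (RootOf parent a) (RootOf parent b) := by simp only [le_min_iff]; omega
    have hmM : min (RootOf parent a) (RootOf parent b) <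
        max (RootOf parent a) (RootOf parent b) := by
      rcases max_cases (RootOf parent a) (RootOf parent b) with ⟨h1, h2⟩ | ⟨h1, h2⟩ <;>
        simp only [min_def] <;> split <;> omega
    have hMlen : (max (RootOf parent a) (RootOf parent b)).toNat < parent.length := by
      rcases max_cases (RootOf parent a) (RootOf parent b) with ⟨h1, h2⟩ | ⟨h1, h2⟩ <;>
        rw [h1] <;> omega
    have hMfix : PySem.List.pyGetD parent (max (RootOf parent a) (RootOf parent b))
        (max (RootOf parent a) (RootOf parent b)) = max (RootOf parent a) (RootOf parent b) := by
      rcases max_cases (RootOf parent a) (RootOf parent b) with ⟨h1, _⟩ | ⟨h1, _⟩ <;>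
        rw [h1] <;> assumption
    have hmfix : PySem.List.pyGetD parent (min (RootOf parent a) (RootOf parent b))
        (min (RootOf parent a) (RootOf parent b)) = min (RootOf parent a) (RootOf parent b) := by
      rcases min_cases (RootOf parent a) (RootOf parent b) with ⟨h1, _⟩ | ⟨h1, _⟩ <;>
        rw [h1] <;> assumption
    refine ⟨?_, ?_, ?_⟩
    · rw [hu]; exact goodUF_set parent hg _ _ hm0 hmM
    · rw [hu, List.length_set]
    · intro x hx
      rw [hu, root_set parent hg _ _ hm0 hmM hMlen hMfix hmfix x.toNat x hx le_rfl]
      simp [hne]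
  · have hu : unionUF parent a b = parent := by
      unfold unionUF
      rw [if_neg hne]
    rw [hu]
    refine ⟨hg, rfl, ?_⟩
    intro x hx
    rw [if_neg (by simp [hne])]



-- ---------- phase 1 of B: folding the unions over all cells ----------
def stepUR (maps : List String) (w : Int) (par : List Int) (c : Int × Int) : List Int :=
  if c.2 + 1 < w ∧ chAt maps c.1 (c.2 + 1) ≠ 'X'
  then unionUF par (c.1 * w + c.2) (c.1 * w + c.2 + 1) else par

def stepU (maps : List String) (h w : Int) (par : List Int) (c : Int × Int) : List Int :=
  if chAt maps c.1 c.2 = 'X' then par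
  else
    if c.1 + 1 < h ∧ chAt maps (c.1 + 1) c.2 ≠ 'X'
    then unionUF (stepUR maps w par c) (c.1 * w + c.2) (c.1 * w + c.2 + w)
    else stepUR maps w par c

theorem fold_nested_eq {σ : Type} (h w : Int) (f : σ → (Int × Int) → σ) (init : σ) :
    (PySem.List.pyRange 0 h).foldl
      (fun s i => (PySem.List.pyRange 0 w).foldl (fun s j => f s (i, j)) s) init
      = (cellsB h w).foldl f init := by
  unfold cellsB
  rw [List.foldl_flatMap]
  simp only [List.foldl_map]

-- the union-find invariant: a good forest whose root-equalities only relate connected cells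
def UFcore (maps : List String) (h w : Int) (par : List Int) : Prop :=
  GoodUF par ∧ par.length = (h * w).toNat ∧
  ∀ c d : Int × Int, ELc maps h w c → ELc maps h w d →
    RootOf par (c.1 * w + c.2) = RootOf par (d.1 * w + d.2) →
    Reach (ELc maps h w) (fun _ => False) c d

-- the processed right/down edges are root-equal
def Edges (maps : List String) (h w : Int) (P : List (Int × Int)) (par : List Int) : Prop :=
  ∀ c ∈ P, (0 ≤ c.1 ∧ c.1 < h ∧ 0 ≤ c.2 ∧ c.2 < w) → chAt maps c.1 c.2 ≠ 'X' →
    (c.2 + 1 < w ∧ chAt maps c.1 (c.2 + 1) ≠ 'X' →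
      RootOf par (c.1 * w + c.2) = RootOf par (c.1 * w + (c.2 + 1))) ∧
    (c.1 + 1 < h ∧ chAt maps (c.1 + 1) c.2 ≠ 'X' →
      RootOf par (c.1 * w + c.2) = RootOf par ((c.1 + 1) * w + c.2))

theorem ELc_inB {maps : List String} {h w : Int} {c : Int × Int} (hc : ELc maps h w c) :
    0 ≤ c.1 ∧ c.1 < h ∧ 0 ≤ c.2 ∧ c.2 < w :=
  ⟨hc.1, hc.2.1, hc.2.2.1, hc.2.2.2.1⟩

-- one union between two adjacent eligible cells preserves the invariant, keeps old
-- root-equalities, and makes the two cells root-equal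
theorem union_step (maps : List String) (h w : Int) (par : List Int)
    (hcore : UFcore maps h w par) (c n : Int × Int)
    (hc : ELc maps h w c) (hn : ELc maps h w n) (hadj : n ∈ nbrs c) :
    UFcore maps h w (unionUF par (c.1 * w + c.2) (n.1 * w + n.2)) ∧
    (∀ x y : Int, 0 ≤ x → 0 ≤ y → RootOf par x = RootOf par y →
      RootOf (unionUF par (c.1 * w + c.2) (n.1 * w + n.2)) x
        = RootOf (unionUF par (c.1 * w + c.2) (n.1 * w + n.2)) y) ∧
    RootOf (unionUF par (c.1 * w + c.2) (n.1 * w + n.2)) (c.1 * w + c.2)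
      = RootOf (unionUF par (c.1 * w + c.2) (n.1 * w + n.2)) (n.1 * w + n.2) := by
  obtain ⟨hg, hlen, hsound⟩ := hcore
  have hbc := enc_bounds h w c (ELc_inB hc)
  have hbn := enc_bounds h w n (ELc_inB hn)
  obtain ⟨hg', hlen', hchar⟩ := unionUF_spec par hg (c.1 * w + c.2) (n.1 * w + n.2)
    hbc.1 hbn.1 (by omega) (by omega)
  have hmono : ∀ x y : Int, 0 ≤ x → 0 ≤ y → RootOf par x = RootOf par y →
      RootOf (unionUF par (c.1 * w + c.2) (n.1 * w + n.2)) x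
        = RootOf (unionUF par (c.1 * w + c.2) (n.1 * w + n.2)) y := by
    intro x y hx hy hxy
    rw [hchar x hx, hchar y hy, hxy]
  have hedge : RootOf (unionUF par (c.1 * w + c.2) (n.1 * w + n.2)) (c.1 * w + c.2)
      = RootOf (unionUF par (c.1 * w + c.2) (n.1 * w + n.2)) (n.1 * w + n.2) := by
    rw [hchar _ hbc.1, hchar _ hbn.1]
    by_cases hrr : RootOf par (c.1 * w + c.2) = RootOf par (n.1 * w + n.2)
    · rw [if_neg (by simp [hrr]), if_neg (by simp [hrr]), hrr]
    · rcases le_total (RootOf par (c.1 * w + c.2)) (RootOf par (n.1 * w + n.2)) with hab | hab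
      · rw [max_eq_right hab, min_eq_left hab,
          if_neg (by intro hh; exact hrr (by omega)), if_pos ⟨hrr, rfl⟩]
      · rw [max_eq_left hab, min_eq_right hab, if_pos ⟨hrr, rfl⟩,
          if_neg (by intro hh; exact hrr (by omega))]
  refine ⟨⟨hg', by omega, ?_⟩, hmono, hedge⟩
  intro c' d' hc' hd' hroot'
  have hbc' := enc_bounds h w c' (ELc_inB hc')
  have hbd' := enc_bounds h w d' (ELc_inB hd')
  have hcn : Reach (ELc maps h w) (fun _ => False) c n :=
    Reach.step Reach.refl hadj hn not_false
  rw [hchar _ hbc'.1, hchar _ hbd'.1] at hroot'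
  by_cases h1 : RootOf par (c.1 * w + c.2) ≠ RootOf par (n.1 * w + n.2) ∧
      RootOf par (c'.1 * w + c'.2)
        = max (RootOf par (c.1 * w + c.2)) (RootOf par (n.1 * w + n.2))
  · rw [if_pos h1] at hroot'
    by_cases h2 : RootOf par (c.1 * w + c.2) ≠ RootOf par (n.1 * w + n.2) ∧
        RootOf par (d'.1 * w + d'.2)
          = max (RootOf par (c.1 * w + c.2)) (RootOf par (n.1 * w + n.2))
    · rw [if_pos h2] at hroot'
      exact hsound c' d' hc' hd' (by omega)
    · rw [if_neg h2] at hroot'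
      -- Root c' = max, Root d' = min, and max ≠ min: one root is c's, the other n's
      rcases max_choice (RootOf par (c.1 * w + c.2)) (RootOf par (n.1 * w + n.2)) with hM | hM
      · have hm : min (RootOf par (c.1 * w + c.2)) (RootOf par (n.1 * w + n.2))
            = RootOf par (n.1 * w + n.2) := by
          rcases min_choice (RootOf par (c.1 * w + c.2)) (RootOf par (n.1 * w + n.2)) with
            hmm | hmm
          · exfalso; exact h1.1 (by omega)
          · exact hmm
        have hr1 : Reach (ELc maps h w) (fun _ => False) c' c :=
          hsound c' c hc' hc (by omega)
        have hr2 : Reach (ELc maps h w) (fun _ => False) d' n :=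
          hsound d' n hd' hn (by omega)
        exact Reach_trans hr1 (Reach_trans hcn (Reach_symm hd' hr2))
      · have hm : min (RootOf par (c.1 * w + c.2)) (RootOf par (n.1 * w + n.2))
            = RootOf par (c.1 * w + c.2) := by
          rcases min_choice (RootOf par (c.1 * w + c.2)) (RootOf par (n.1 * w + n.2)) with
            hmm | hmm
          · exact hmm
          · exfalso; exact h1.1 (by omega)
        have hr1 : Reach (ELc maps h w) (fun _ => False) c' n :=
          hsound c' n hc' hn (by omega)
        have hr2 : Reach (ELc maps h w) (fun _ => False) d' c :=
          hsound d' c hd' hc (by omega)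
        exact Reach_trans hr1 (Reach_trans (Reach_symm hc hcn) (Reach_symm hd' hr2))
  · rw [if_neg h1] at hroot'
    by_cases h2 : RootOf par (c.1 * w + c.2) ≠ RootOf par (n.1 * w + n.2) ∧
        RootOf par (d'.1 * w + d'.2)
          = max (RootOf par (c.1 * w + c.2)) (RootOf par (n.1 * w + n.2))
    · rw [if_pos h2] at hroot'
      rcases max_choice (RootOf par (c.1 * w + c.2)) (RootOf par (n.1 * w + n.2)) with hM | hM
      · have hm : min (RootOf par (c.1 * w + c.2)) (RootOf par (n.1 * w + n.2))
            = RootOf par (n.1 * w + n.2) := by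
          rcases min_choice (RootOf par (c.1 * w + c.2)) (RootOf par (n.1 * w + n.2)) with
            hmm | hmm
          · exfalso; exact h2.1 (by omega)
          · exact hmm
        have hr1 : Reach (ELc maps h w) (fun _ => False) c' n :=
          hsound c' n hc' hn (by omega)
        have hr2 : Reach (ELc maps h w) (fun _ => False) d' c :=
          hsound d' c hd' hc (by omega)
        exact Reach_trans hr1 (Reach_trans (Reach_symm hc hcn) (Reach_symm hd' hr2))
      · have hm : min (RootOf par (c.1 * w + c.2)) (RootOf par (n.1 * w + n.2))
            = RootOf par (c.1 * w + c.2) := by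
          rcases min_choice (RootOf par (c.1 * w + c.2)) (RootOf par (n.1 * w + n.2)) with
            hmm | hmm
          · exact hmm
          · exfalso; exact h2.1 (by omega)
        have hr1 : Reach (ELc maps h w) (fun _ => False) c' c :=
          hsound c' c hc' hc (by omega)
        have hr2 : Reach (ELc maps h w) (fun _ => False) d' n :=
          hsound d' n hd' hn (by omega)
        exact Reach_trans hr1 (Reach_trans hcn (Reach_symm hd' hr2))
    · rw [if_neg h2] at hroot'
      exact hsound c' d' hc' hd' hroot'



theorem Edges_mono (maps : List String) (h w : Int) (P : List (Int × Int)) (par par' : List Int)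
    (hmono : ∀ x y : Int, 0 ≤ x → 0 ≤ y → RootOf par x = RootOf par y →
      RootOf par' x = RootOf par' y)
    (he : Edges maps h w P par) : Edges maps h w P par' := by
  intro e heP hInB hch
  obtain ⟨h1, h2⟩ := he e heP hInB hch
  have hbe := enc_bounds h w e hInB
  constructor
  · intro hcond
    exact hmono _ _ hbe.1
      (enc_bounds h w (e.1, e.2 + 1) ⟨hInB.1, hInB.2.1, by omega, hcond.1⟩).1 (h1 hcond)
  · intro hcond
    exact hmono _ _ hbe.1
      (enc_bounds h w (e.1 + 1, e.2) ⟨by omega, hcond.1, hInB.2.2.1, hInB.2.2.2⟩).1 (h2 hcond)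

-- processing one cell preserves the invariant and records that cell's edges
theorem stepU_inv (maps : List String) (h w : Int) (par : List Int) (c : Int × Int)
    (hc : 0 ≤ c.1 ∧ c.1 < h ∧ 0 ≤ c.2 ∧ c.2 < w)
    (P : List (Int × Int))
    (hcore : UFcore maps h w par) (hedg : Edges maps h w P par) :
    UFcore maps h w (stepU maps h w par c) ∧
    Edges maps h w (P ++ [c]) (stepU maps h w par c) := by
  have hEdgesApp : ∀ par' : List Int, Edges maps h w P par' →
      (chAt maps c.1 c.2 ≠ 'X' →
        (c.2 + 1 < w ∧ chAt maps c.1 (c.2 + 1) ≠ 'X' →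
          RootOf par' (c.1 * w + c.2) = RootOf par' (c.1 * w + (c.2 + 1))) ∧
        (c.1 + 1 < h ∧ chAt maps (c.1 + 1) c.2 ≠ 'X' →
          RootOf par' (c.1 * w + c.2) = RootOf par' ((c.1 + 1) * w + c.2))) →
      Edges maps h w (P ++ [c]) par' := by
    intro par' hP hcEntry e heP hInB hch
    rcases List.mem_append.1 heP with hePP | heC
    · exact hP e hePP hInB hch
    · rw [List.mem_singleton] at heC
      subst heC
      exact hcEntry hch
  unfold stepU stepUR
  by_cases hx : chAt maps c.1 c.2 = 'X'
  · rw [if_pos hx]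
    exact ⟨hcore, hEdgesApp par hedg (fun hch => absurd hx hch)⟩
  · rw [if_neg hx]
    have hcel : ELc maps h w c := ⟨hc.1, hc.2.1, hc.2.2.1, hc.2.2.2, hx⟩
    have he1 : c.1 * w + c.2 + 1 = (c.1, c.2 + 1).1 * w + (c.1, c.2 + 1).2 := by
      show _ = c.1 * w + (c.2 + 1); ring
    have he2 : c.1 * w + c.2 + w = (c.1 + 1, c.2).1 * w + (c.1 + 1, c.2).2 := by
      show _ = (c.1 + 1) * w + c.2; ring
    by_cases hr : c.2 + 1 < w ∧ chAt maps c.1 (c.2 + 1) ≠ 'X'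
    · have hnel : ELc maps h w (c.1, c.2 + 1) := ⟨hc.1, hc.2.1, by omega, hr.1, hr.2⟩
      have hadj : ((c.1, c.2 + 1) : Int × Int) ∈ nbrs c := by simp [nbrs]
      obtain ⟨hcore1, hmono1, hedge1⟩ := union_step maps h w par hcore c (c.1, c.2 + 1)
        hcel hnel hadj
      rw [if_pos hr, he1]
      by_cases hd : c.1 + 1 < h ∧ chAt maps (c.1 + 1) c.2 ≠ 'X'
      · have hdel : ELc maps h w (c.1 + 1, c.2) := ⟨by omega, hd.1, hc.2.2.1, hc.2.2.2, hd.2⟩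
        have hadj2 : ((c.1 + 1, c.2) : Int × Int) ∈ nbrs c := by simp [nbrs]
        obtain ⟨hcore2, hmono2, hedge2⟩ := union_step maps h w
          (unionUF par (c.1 * w + c.2) ((c.1, c.2 + 1).1 * w + (c.1, c.2 + 1).2))
          hcore1 c (c.1 + 1, c.2) hcel hdel hadj2
        rw [if_pos hd, he2]
        refine ⟨hcore2, hEdgesApp _ (Edges_mono maps h w P _ _ hmono2
          (Edges_mono maps h w P _ _ hmono1 hedg)) ?_⟩
        intro _
        have hbc := enc_bounds h w c hc
        have hbn := enc_bounds h w (c.1, c.2 + 1) (ELc_inB hnel)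
        exact ⟨fun _ => hmono2 _ _ hbc.1 hbn.1 hedge1, fun _ => hedge2⟩
      · rw [if_neg hd]
        refine ⟨hcore1, hEdgesApp _ (Edges_mono maps h w P _ _ hmono1 hedg) ?_⟩
        intro _
        exact ⟨fun _ => hedge1, fun hcond => absurd hcond hd⟩
    · rw [if_neg hr]
      by_cases hd : c.1 + 1 < h ∧ chAt maps (c.1 + 1) c.2 ≠ 'X'
      · have hdel : ELc maps h w (c.1 + 1, c.2) := ⟨by omega, hd.1, hc.2.2.1, hc.2.2.2, hd.2⟩
        have hadj2 : ((c.1 + 1, c.2) : Int × Int) ∈ nbrs c := by simp [nbrs]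
        obtain ⟨hcore2, hmono2, hedge2⟩ := union_step maps h w par hcore c (c.1 + 1, c.2)
          hcel hdel hadj2
        rw [if_pos hd, he2]
        refine ⟨hcore2, hEdgesApp _ (Edges_mono maps h w P _ _ hmono2 hedg) ?_⟩
        intro _
        exact ⟨fun hcond => absurd hcond hr, fun _ => hedge2⟩
      · rw [if_neg hd]
        refine ⟨hcore, hEdgesApp _ hedg ?_⟩
        intro _
        exact ⟨fun hcond => absurd hcond hr, fun hcond => absurd hcond hd⟩

theorem uf_fold (maps : List String) (h w : Int) :
    ∀ (L P : List (Int × Int)) (par : List Int),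
      (∀ c ∈ L, 0 ≤ c.1 ∧ c.1 < h ∧ 0 ≤ c.2 ∧ c.2 < w) →
      UFcore maps h w par → Edges maps h w P par →
      UFcore maps h w (L.foldl (stepU maps h w) par) ∧
      Edges maps h w (P ++ L) (L.foldl (stepU maps h w) par) := by
  intro L
  induction L with
  | nil =>
    intro P par _ hcore hedg
    simpa using ⟨hcore, hedg⟩
  | cons c L ih =>
    intro P par hL hcore hedg
    obtain ⟨hcore1, hedg1⟩ := stepU_inv maps h w par c (hL c List.mem_cons_self) P hcore hedg
    obtain ⟨hcore2, hedg2⟩ := ih (P ++ [c]) (stepU maps h w par c)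
      (fun e he => hL e (List.mem_cons_of_mem _ he)) hcore1 hedg1
    rw [List.foldl_cons]
    refine ⟨hcore2, ?_⟩
    have : P ++ c :: L = (P ++ [c]) ++ L := by simp
    rw [this]
    exact hedg2


theorem pyRange_getElem_zero (n : Int) (k : Nat) (hk : k < (PySem.List.pyRange 0 n).length) :
    (PySem.List.pyRange 0 n)[k] = (k : Int) := by
  have hlen := hk
  rw [PySem.List.length_pyRange_one] at hlen
  have hn : n = ((n.toNat : Nat) : Int) := by omega
  have hk2 : k < n.toNat := by omega
  have hopt : (PySem.List.pyRange 0 n)[k]? = some ((k : Nat) : Int) := by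
    rw [hn, PySem.List.pyRange_zero_natCast, List.getElem?_map, List.getElem?_range hk2]
    rfl
  rw [List.getElem?_eq_getElem hk] at hopt
  exact Option.some.inj hopt

-- the identity forest list(range(n))
theorem goodUF_parent0 (n : Int) : GoodUF (PySem.List.pyRange 0 n) := by
  intro k hk
  rw [pyRange_getElem_zero n k hk]
  constructor <;> omega

theorem parent0_root (n : Int) (x : Int) (hx : 0 ≤ x) :
    RootOf (PySem.List.pyRange 0 n) x = x := by
  apply rootOf_of_fix _ (goodUF_parent0 n) x hx
  rw [PySem.List.pyGetD_of_nonneg _ _ hx]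
  by_cases hlt : x.toNat < (PySem.List.pyRange 0 n).length
  · rw [List.getD_eq_getElem _ _ hlt, pyRange_getElem_zero n x.toNat hlt]
    omega
  · rw [List.getD_eq_default _ _ (by omega)]

theorem parent0_core (maps : List String) (h w : Int) :
    UFcore maps h w (PySem.List.pyRange 0 (h * w)) := by
  refine ⟨goodUF_parent0 (h * w), ?_, ?_⟩
  · rw [PySem.List.length_pyRange_one]
    omega
  · intro c d hc hd hroot
    rw [parent0_root _ _ (enc_bounds h w c (ELc_inB hc)).1,
      parent0_root _ _ (enc_bounds h w d (ELc_inB hd)).1] at hroot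
    have : c = d := enc_inj w c d ⟨hc.2.2.1, hc.2.2.2.1⟩ ⟨hd.2.2.1, hd.2.2.2.1⟩ hroot
    rw [this]
    exact Reach.refl

-- connected cells are root-equal once every cell's edges are recorded
theorem conn_rootEq (maps : List String) (h w : Int) (par : List Int)
    (hedg : Edges maps h w (cellsB h w) par) :
    ∀ c d : Int × Int, ELc maps h w c →
      Reach (ELc maps h w) (fun _ => False) c d →
      RootOf par (c.1 * w + c.2) = RootOf par (d.1 * w + d.2) := by
  intro c d hc hr
  induction hr with
  | refl => rfl
  | step hre hn he hblk ih =>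
    rename_i e d'
    have hee : ELc maps h w e := by
      rcases Reach_elig hre with heq | ⟨h1, _⟩
      · rw [heq]; exact hc
      · exact h1
    refine ih.trans ?_
    simp only [nbrs, List.mem_cons, List.not_mem_nil, or_false] at hn
    rcases hn with hn | hn | hn | hn
    · -- d' is the down neighbour of e
      have hent := hedg e ((mem_cellsB h w e).2 (ELc_inB hee)) (ELc_inB hee) hee.2.2.2.2
      have := hent.2 ⟨by rw [hn] at he; exact he.2.1, by rw [hn] at he; exact he.2.2.2.2⟩
      rw [hn]
      exact this
    · -- d' is the up neighbour of e: use d''s own down edge, reversed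
      have hd' : ELc maps h w d' := he
      have hent := hedg d' ((mem_cellsB h w d').2 (ELc_inB hd')) (ELc_inB hd') hd'.2.2.2.2
      have heq1 : d'.1 + 1 = e.1 := by rw [hn]; ring
      have heq2 : d'.2 = e.2 := by rw [hn]
      have := hent.2 ⟨by rw [heq1]; exact hee.2.1, by rw [heq1, heq2]; exact hee.2.2.2.2⟩
      rw [← heq1, ← heq2]
      exact this.symm
    · -- d' is the right neighbour of e
      have hent := hedg e ((mem_cellsB h w e).2 (ELc_inB hee)) (ELc_inB hee) hee.2.2.2.2
      have := hent.1 ⟨by rw [hn] at he; exact he.2.2.2.1, by rw [hn] at he; exact he.2.2.2.2⟩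
      rw [hn]
      exact this
    · -- d' is the left neighbour of e: use d''s own right edge, reversed
      have hd' : ELc maps h w d' := he
      have hent := hedg d' ((mem_cellsB h w d').2 (ELc_inB hd')) (ELc_inB hd') hd'.2.2.2.2
      have heq1 : d'.1 = e.1 := by rw [hn]
      have heq2 : d'.2 + 1 = e.2 := by rw [hn]; ring
      have := hent.1 ⟨by rw [heq2]; exact hee.2.2.2.1, by rw [heq1, heq2]; exact hee.2.2.2.2⟩
      rw [← heq1, ← heq2]
      exact this.symm


-- ---------- characterizing A's BFS ----------
def accA (maps : List String) (mY mX : Int) (v : List (List Bool))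
    (ds : List (Int × Int)) : List (Int × Int) :=
  ds.filter (fun d => decide (0 ≤ d.1 ∧ d.1 < mY ∧ 0 ≤ d.2 ∧ d.2 < mX ∧
    chAt maps d.1 d.2 ≠ 'X' ∧ mkA v d = false))

theorem mem_accA (maps : List String) (mY mX : Int) (v : List (List Bool))
    (ds : List (Int × Int)) (d : Int × Int) :
    d ∈ accA maps mY mX v ds ↔ (d ∈ ds ∧ ELc maps mY mX d ∧ mkA v d = false) := by
  unfold accA ELc
  rw [List.mem_filter]
  simp only [decide_eq_true_eq]
  tauto

theorem foldA_char (maps : List String) (mY mX : Int) :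
    ∀ (ds : List (Int × Int)), ds.Nodup →
      ∀ (q : List (Int × Int)) (v : List (List Bool)) (vol : Int),
      ((ds.foldl (stepA maps mY mX) (q, v, vol)).1 = q ++ accA maps mY mX v ds)
      ∧ (∀ e : Int × Int, 0 ≤ e.1 → 0 ≤ e.2 →
          (mkA (ds.foldl (stepA maps mY mX) (q, v, vol)).2.1 e = true
            ↔ (mkA v e = true ∨ e ∈ accA maps mY mX v ds)))
      ∧ ((ds.foldl (stepA maps mY mX) (q, v, vol)).2.2
          = vol + ((accA maps mY mX v ds).map (fun d => valAt maps d.1 d.2)).sum) := by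
  intro ds
  induction ds with
  | nil => intro _ q v vol; simp [accA]
  | cons d tl ih =>
    intro hnd q v vol
    have hndtl : tl.Nodup := (List.nodup_cons.1 hnd).2
    have hdn : d ∉ tl := (List.nodup_cons.1 hnd).1
    simp only [List.foldl_cons]
    by_cases hg : 0 ≤ d.1 ∧ d.1 < mY ∧ 0 ≤ d.2 ∧ d.2 < mX ∧
        chAt maps d.1 d.2 ≠ 'X' ∧ mkA v d = false
    · obtain ⟨h1, h2, h3, h4, h5, h6⟩ := hg
      have hstep : stepA maps mY mX (q, v, vol) d
          = (q ++ [d], markA v d, vol + valAt maps d.1 d.2) := by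
        unfold stepA
        rw [if_pos ⟨h1, h2, h3, h4, h5, h6⟩]
      rw [hstep]
      obtain ⟨ih1, ih2, ih3⟩ := ih hndtl (q ++ [d]) (markA v d) (vol + valAt maps d.1 d.2)
      have hmark : ∀ e : Int × Int, 0 ≤ e.1 → 0 ≤ e.2 →
          (mkA (markA v d) e = true ↔ (mkA v e = true ∨ e = d)) :=
        fun e he1 he2 => mkA_markA v d e h6 h1 h3 he1 he2
      have hfc : accA maps mY mX (markA v d) tl = accA maps mY mX v tl := by
        unfold accA
        apply List.filter_congr
        intro x hx
        apply decide_eq_decide.mpr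
        have hxd : x ≠ d := fun hh => hdn (hh ▸ hx)
        constructor
        · rintro ⟨b1, b2, b3, b4, b5, b6⟩
          refine ⟨b1, b2, b3, b4, b5, ?_⟩
          cases hv : mkA v x
          · rfl
          · exact absurd ((hmark x b1 b3).mpr (Or.inl hv)) (by simp [b6])
        · rintro ⟨b1, b2, b3, b4, b5, b6⟩
          refine ⟨b1, b2, b3, b4, b5, ?_⟩
          cases hm : mkA (markA v d) x
          · rfl
          · rcases (hmark x b1 b3).mp hm with hv | hv
            · exact absurd hv (by simp [b6])
            · exact absurd hv hxd
      have haccons : accA maps mY mX v (d :: tl) = d :: accA maps mY mX v tl := by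
        unfold accA
        rw [List.filter_cons, if_pos (by simp [h1, h2, h3, h4, h5, h6])]
      refine ⟨?_, ?_, ?_⟩
      · rw [ih1, hfc, haccons]
        simp
      · intro e he1 he2
        rw [ih2 e he1 he2, hfc, hmark e he1 he2, haccons]
        simp only [List.mem_cons]
        tauto
      · rw [ih3, hfc, haccons]
        simp only [List.map_cons, List.sum_cons]
        ring
    · have hstep : stepA maps mY mX (q, v, vol) d = (q, v, vol) := by
        unfold stepA
        rw [if_neg hg]
      have haccons : accA maps mY mX v (d :: tl) = accA maps mY mX v tl := by
        unfold accA
        rw [List.filter_cons, if_neg (by simpa using hg)]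
      rw [hstep, haccons]
      exact ih hndtl q v vol

theorem nbrsA_eq_nbrs (c e : Int × Int) :
    e ∈ [(0 + c.1, 1 + c.2), (1 + c.1, 0 + c.2), (0 + c.1, -1 + c.2), (-1 + c.1, 0 + c.2)]
      ↔ e ∈ nbrs c := by
  simp [nbrs, Prod.ext_iff]
  omega

theorem nbrsA_nodup (c : Int × Int) :
    ([(0 + c.1, 1 + c.2), (1 + c.1, 0 + c.2), (0 + c.1, -1 + c.2), (-1 + c.1, 0 + c.2)]
      : List (Int × Int)).Nodup := by
  simp [Prod.ext_iff]

-- one worklist round: popping c0 and marking its fresh eligible neighbours `acc` turns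
-- "unmarked and reachable from the old worklist" into "in acc, or unmarked and reachable
-- from the new worklist"; this is what makes the processing order irrelevant
theorem reach_exchange (EL M : Int × Int → Prop) (c0 : Int × Int)
    (rest acc : List (Int × Int))
    (hM0 : M c0)
    (hacc : ∀ d, d ∈ acc ↔ (d ∈ nbrs c0 ∧ EL d ∧ ¬ M d)) (e : Int × Int) :
    (¬ M e ∧ ∃ a, (a = c0 ∨ a ∈ rest) ∧ Reach EL M a e)
      ↔ (e ∈ acc ∨ (¬ (M e ∨ e ∈ acc) ∧
          ∃ a', (a' ∈ rest ∨ a' ∈ acc) ∧ Reach EL (fun x => M x ∨ x ∈ acc) a' e)) := by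
  constructor
  · rintro ⟨hMe, a, ha, hr⟩
    by_cases hec : e ∈ acc
    · exact Or.inl hec
    · refine Or.inr ⟨by tauto, ?_⟩
      have aux : ∀ e', Reach EL M a e' → ¬ (M e' ∨ e' ∈ acc) →
          ∃ a', (a' ∈ rest ∨ a' ∈ acc) ∧ Reach EL (fun x => M x ∨ x ∈ acc) a' e' := by
        intro e' hre
        induction hre with
        | refl =>
          intro hne
          rcases ha with rfl | har
          · exact absurd (Or.inl hM0) hne
          · exact ⟨a, Or.inl har, Reach.refl⟩
        | step hrc hn he hb ih =>
          intro hnd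
          rename_i cc dd
          by_cases hc : M cc ∨ cc ∈ acc
          · rcases hc with hMc | hcacc
            · rcases Reach_elig hrc with rfl | ⟨_, hnc⟩
              · rcases ha with rfl | har
                · exact absurd (Or.inr ((hacc dd).2 ⟨hn, he, hb⟩)) hnd
                · exact ⟨cc, Or.inl har, Reach.step Reach.refl hn he hnd⟩
              · exact absurd hMc hnc
            · exact ⟨cc, Or.inr hcacc, Reach.step Reach.refl hn he hnd⟩
          · obtain ⟨a', ha', hr'⟩ := ih hc
            exact ⟨a', ha', Reach.step hr' hn he hnd⟩
      exact aux e hr (by tauto)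
  · rintro (hec | ⟨hne, a', ha', hr'⟩)
    · obtain ⟨hn, he, hm⟩ := (hacc e).1 hec
      exact ⟨hm, c0, Or.inl rfl, Reach.step Reach.refl hn he hm⟩
    · have hMe : ¬ M e := fun h => hne (Or.inl h)
      refine ⟨hMe, ?_⟩
      have hr2 : Reach EL M a' e := Reach_anti (fun x h => Or.inl h) hr'
      rcases ha' with har | haacc
      · exact ⟨a', Or.inr har, hr2⟩
      · obtain ⟨hn, he2, hm⟩ := (hacc a').1 haacc
        exact ⟨c0, Or.inl rfl, Reach_trans (Reach.step Reach.refl hn he2 hm) hr2⟩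

-- the BFS while-loop marks exactly the reachable unmarked cells and adds their values
theorem bfsLoop_spec (maps : List String) (mY mX : Int) :
    ∀ (q : List (Int × Int)) (v : List (List Bool)) (vol : Int),
      (∀ c ∈ q, mkA v c = true ∧ 0 ≤ c.1 ∧ 0 ≤ c.2) → q.Nodup →
      ∃ N : List (Int × Int),
        N.Nodup
        ∧ (∀ c : Int × Int, c ∈ N ↔ (¬ mkA v c = true ∧
            ∃ a, a ∈ q ∧ Reach (ELc maps mY mX) (fun x => mkA v x = true) a c))
        ∧ (∀ e : Int × Int, 0 ≤ e.1 → 0 ≤ e.2 →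
            (mkA (bfsLoop maps mY mX q v vol).1 e = true ↔ (mkA v e = true ∨ e ∈ N)))
        ∧ (bfsLoop maps mY mX q v vol).2
            = vol + (N.map (fun d => valAt maps d.1 d.2)).sum := by
  intro q v vol
  induction q, v, vol using bfsLoop.induct maps mY mX with
  | case1 v vol =>
    intro _ _
    refine ⟨[], by simp, by simp, ?_, by simp [bfsLoop]⟩
    intro e _ _
    rw [bfsLoop]
    simp
  | case2 v vol now rest s ih =>
    intro hq hnd
    have hpre : (PySem.List.pyRange 0 4).foldl (bfsVisit maps mY mX now) (rest, v, vol)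
        = ([(0 + now.1, 1 + now.2), (1 + now.1, 0 + now.2), (0 + now.1, -1 + now.2),
          (-1 + now.1, 0 + now.2)] : List (Int × Int)).foldl (stepA maps mY mX) (rest, v, vol) := rfl
    obtain ⟨hmk0, hn01, hn02⟩ := hq now List.mem_cons_self
    have hqr : ∀ c ∈ rest, mkA v c = true ∧ 0 ≤ c.1 ∧ 0 ≤ c.2 :=
      fun c hc => hq c (List.mem_cons_of_mem _ hc)
    have hndr : rest.Nodup := (List.nodup_cons.1 hnd).2
    obtain ⟨hf1, hf2, hf3⟩ := foldA_char maps mY mX _ (nbrsA_nodup now) rest v vol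
    have haccmem : ∀ d : Int × Int, d ∈ accA maps mY mX v ([(0 + now.1, 1 + now.2), (1 + now.1, 0 + now.2), (0 + now.1, -1 + now.2),
          (-1 + now.1, 0 + now.2)] : List (Int × Int))
        ↔ (d ∈ nbrs now ∧ ELc maps mY mX d ∧ ¬ mkA v d = true) := by
      intro d
      rw [mem_accA, ← nbrsA_eq_nbrs now d]
      simp
    have haccprop : ∀ d ∈ accA maps mY mX v ([(0 + now.1, 1 + now.2), (1 + now.1, 0 + now.2), (0 + now.1, -1 + now.2),
          (-1 + now.1, 0 + now.2)] : List (Int × Int)),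
        ELc maps mY mX d ∧ mkA v d = false :=
      fun d hd => ((mem_accA _ _ _ _ _ d).1 hd).2
    have hq' : ∀ c ∈ rest ++ accA maps mY mX v ([(0 + now.1, 1 + now.2), (1 + now.1, 0 + now.2), (0 + now.1, -1 + now.2),
          (-1 + now.1, 0 + now.2)] : List (Int × Int)),
        mkA (([(0 + now.1, 1 + now.2), (1 + now.1, 0 + now.2), (0 + now.1, -1 + now.2),
          (-1 + now.1, 0 + now.2)] : List (Int × Int)).foldl (stepA maps mY mX) (rest, v, vol)).2.1 c = true ∧ 0 ≤ c.1 ∧ 0 ≤ c.2 := by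
      intro c hc
      rcases List.mem_append.1 hc with hcr | hca
      · have hh := hqr c hcr
        exact ⟨(hf2 c hh.2.1 hh.2.2).2 (Or.inl hh.1), hh.2.1, hh.2.2⟩
      · have hel := (haccprop c hca).1
        exact ⟨(hf2 c hel.1 hel.2.2.1).2 (Or.inr hca), hel.1, hel.2.2.1⟩
    have hnd' : (rest ++ accA maps mY mX v ([(0 + now.1, 1 + now.2), (1 + now.1, 0 + now.2), (0 + now.1, -1 + now.2),
          (-1 + now.1, 0 + now.2)] : List (Int × Int))).Nodup := by
      refine List.Nodup.append hndr (List.Nodup.filter _ (nbrsA_nodup now)) ?_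
      intro c hcr hca
      have hfa := (haccprop c hca).2
      rw [(hqr c hcr).1] at hfa
      exact absurd hfa (by simp)
    have hseq : s = List.foldl (stepA maps mY mX) (rest, v, vol)
        [(0 + now.1, 1 + now.2), (1 + now.1, 0 + now.2), (0 + now.1, -1 + now.2),
          (-1 + now.1, 0 + now.2)] := hpre
    rw [hseq] at ih
    obtain ⟨N', hndN', hmemN', hmkN', hvolN'⟩ := ih (by rw [hf1]; exact hq') (by rw [hf1]; exact hnd')
    simp only [hf1] at hmemN'
    have hunf : bfsLoop maps mY mX (now :: rest) v vol
        = bfsLoop maps mY mX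
          (([(0 + now.1, 1 + now.2), (1 + now.1, 0 + now.2), (0 + now.1, -1 + now.2),
            (-1 + now.1, 0 + now.2)] : List (Int × Int)).foldl (stepA maps mY mX) (rest, v, vol)).1
          (([(0 + now.1, 1 + now.2), (1 + now.1, 0 + now.2), (0 + now.1, -1 + now.2),
            (-1 + now.1, 0 + now.2)] : List (Int × Int)).foldl (stepA maps mY mX) (rest, v, vol)).2.1
          (([(0 + now.1, 1 + now.2), (1 + now.1, 0 + now.2), (0 + now.1, -1 + now.2),
            (-1 + now.1, 0 + now.2)] : List (Int × Int)).foldl (stepA maps mY mX) (rest, v, vol)).2.2 := by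
      rw [bfsLoop]
      rfl
    rw [hunf]
    refine ⟨accA maps mY mX v ([(0 + now.1, 1 + now.2), (1 + now.1, 0 + now.2), (0 + now.1, -1 + now.2),
          (-1 + now.1, 0 + now.2)] : List (Int × Int)) ++ N', ?_, ?_, ?_, ?_⟩
    · refine List.Nodup.append (List.Nodup.filter _ (nbrsA_nodup now)) hndN' ?_
      intro c hca hcN
      have hel := (haccprop c hca).1
      exact absurd ((hf2 c hel.1 hel.2.2.1).2 (Or.inr hca)) ((hmemN' c).1 hcN).1
    · intro c
      rw [List.mem_append]
      have hex := reach_exchange (ELc maps mY mX) (fun x => mkA v x = true) now rest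
        (accA maps mY mX v ([(0 + now.1, 1 + now.2), (1 + now.1, 0 + now.2), (0 + now.1, -1 + now.2),
          (-1 + now.1, 0 + now.2)] : List (Int × Int))) hmk0 haccmem c
      have hRHS : (¬ mkA v c = true ∧ ∃ a, a ∈ now :: rest ∧
            Reach (ELc maps mY mX) (fun x => mkA v x = true) a c)
          ↔ (c ∈ accA maps mY mX v ([(0 + now.1, 1 + now.2), (1 + now.1, 0 + now.2), (0 + now.1, -1 + now.2),
          (-1 + now.1, 0 + now.2)] : List (Int × Int)) ∨ (¬ (mkA v c = true ∨ c ∈ accA maps mY mX v ([(0 + now.1, 1 + now.2), (1 + now.1, 0 + now.2), (0 + now.1, -1 + now.2),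
          (-1 + now.1, 0 + now.2)] : List (Int × Int))) ∧
              ∃ a', (a' ∈ rest ∨ a' ∈ accA maps mY mX v ([(0 + now.1, 1 + now.2), (1 + now.1, 0 + now.2), (0 + now.1, -1 + now.2),
          (-1 + now.1, 0 + now.2)] : List (Int × Int))) ∧
                Reach (ELc maps mY mX)
                  (fun x => mkA v x = true ∨ x ∈ accA maps mY mX v ([(0 + now.1, 1 + now.2), (1 + now.1, 0 + now.2), (0 + now.1, -1 + now.2),
          (-1 + now.1, 0 + now.2)] : List (Int × Int))) a' c)) := by
        rw [← hex]
        simp [List.mem_cons]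
      rw [hRHS]
      apply or_congr_right
      constructor
      · intro hcN
        obtain ⟨hnm, a, ha, hr⟩ := (hmemN' c).1 hcN
        rcases Reach_elig hr with rfl | ⟨hel, _⟩
        · exact absurd (hq' c ha).1 hnm
        · refine ⟨fun hor => hnm ((hf2 c hel.1 hel.2.2.1).2 hor), a, ?_, ?_⟩
          · exact List.mem_append.1 ha
          · exact Reach_congr (fun x hx => hf2 x hx.1 hx.2.2.1) hr
      · rintro ⟨hnMc, a', ha', hr'⟩
        apply (hmemN' c).2
        have ha2 : a' ∈ rest ++ accA maps mY mX v ([(0 + now.1, 1 + now.2), (1 + now.1, 0 + now.2), (0 + now.1, -1 + now.2),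
          (-1 + now.1, 0 + now.2)] : List (Int × Int)) := List.mem_append.2 ha'
        rcases Reach_elig hr' with rfl | ⟨hel, _⟩
        · exfalso
          rcases ha' with h | h
          · exact hnMc (Or.inl (hqr _ h).1)
          · exact hnMc (Or.inr h)
        · refine ⟨fun hvfc => hnMc ((hf2 c hel.1 hel.2.2.1).1 hvfc), a', ha2, ?_⟩
          exact Reach_congr (fun x hx => (hf2 x hx.1 hx.2.2.1).symm) hr'
    · intro e he1 he2
      rw [hmkN' e he1 he2, hf2 e he1 he2]
      simp only [List.mem_append]
      tauto
    · rw [hvolN', hf3]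
      simp only [List.map_append, List.sum_append]
      ring

theorem sum_eq_of_nodup_mem (f : Int × Int → Int)
    (l₁ l₂ : List (Int × Int)) (h₁ : l₁.Nodup) (h₂ : l₂.Nodup) (hm : ∀ x, x ∈ l₁ ↔ x ∈ l₂) :
    (l₁.map f).sum = (l₂.map f).sum :=
  List.Perm.sum_eq (List.Perm.map f ((List.perm_ext_iff_of_nodup h₁ h₂).2 hm))

theorem foldl_rel {σ τ α : Type} (R : σ → τ → Prop) (f : σ → α → σ) (g : τ → α → τ) :
    ∀ (l : List α) (s : σ) (t : τ), R s t →
      (∀ x ∈ l, ∀ s t, R s t → R (f s x) (g t x)) →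
      R (l.foldl f s) (l.foldl g t) := by
  intro l
  induction l with
  | nil => intro s t h _; exact h
  | cons a tl ih =>
    intro s t h hstep
    exact ih (f s a) (g t a) (hstep a List.mem_cons_self s t h)
      (fun x hx => hstep x (List.mem_cons_of_mem _ hx))

theorem mk_init (maps : List String) (c : Int × Int)
    (hc : 0 ≤ c.1 ∧ c.1 < (maps.length : Int) ∧ 0 ≤ c.2 ∧
      c.2 < PySem.Str.len (PySem.List.pyGetD maps 0 "")) :
    mkA ((PySem.List.pyRange 0 (maps.length : Int)).map
      (fun _ => PySem.List.pyRepeat [false] (PySem.Str.len (PySem.List.pyGetD maps 0 "")))) c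
      = false := by
  obtain ⟨h1, h2, h3, h4⟩ := hc
  unfold mkA
  rw [PySem.List.pyGetD_map_pyRange_of_nonneg _ _ _ _ h1 h2,
    PySem.List.pyRepeat_singleton, PySem.List.pyGetD_of_nonneg _ _ h3,
    List.getD_eq_getElem?_getD, List.getElem?_replicate]
  have hlt : c.2.toNat < (PySem.Str.len (PySem.List.pyGetD maps 0 "")).toNat := by omega
  rw [if_pos hlt]
  rfl


-- ---------- the final forest and its root key ----------
def pfF (maps : List String) : List Int :=
  (cellsB (maps.length : Int) (PySem.Str.len (PySem.List.pyGetD maps 0 ""))).foldl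
    (stepU maps (maps.length : Int) (PySem.Str.len (PySem.List.pyGetD maps 0 "")))
    (PySem.List.pyRange 0 ((maps.length : Int) * PySem.Str.len (PySem.List.pyGetD maps 0 "")))

def rk (maps : List String) (c : Int × Int) : Int :=
  RootOf (pfF maps) (c.1 * PySem.Str.len (PySem.List.pyGetD maps 0 "") + c.2)

theorem pfF_facts (maps : List String) :
    UFcore maps (maps.length : Int) (PySem.Str.len (PySem.List.pyGetD maps 0 "")) (pfF maps) ∧
    Edges maps (maps.length : Int) (PySem.Str.len (PySem.List.pyGetD maps 0 ""))
      (cellsB (maps.length : Int) (PySem.Str.len (PySem.List.pyGetD maps 0 ""))) (pfF maps) := by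
  have hf := uf_fold maps (maps.length : Int) (PySem.Str.len (PySem.List.pyGetD maps 0 ""))
    (cellsB (maps.length : Int) (PySem.Str.len (PySem.List.pyGetD maps 0 ""))) []
    (PySem.List.pyRange 0 ((maps.length : Int) * PySem.Str.len (PySem.List.pyGetD maps 0 "")))
    (fun c hc => (mem_cellsB _ _ c).1 hc)
    (parent0_core maps _ _)
    (fun c hc => absurd hc (List.not_mem_nil))
  rw [List.nil_append] at hf
  exact hf

-- two eligible cells are root-equal iff they are connected
theorem rk_bridge (maps : List String) (c d : Int × Int)
    (hc : ELc maps (maps.length : Int) (PySem.Str.len (PySem.List.pyGetD maps 0 "")) c)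
    (hd : ELc maps (maps.length : Int) (PySem.Str.len (PySem.List.pyGetD maps 0 "")) d) :
    rk maps c = rk maps d ↔
      Reach (ELc maps (maps.length : Int) (PySem.Str.len (PySem.List.pyGetD maps 0 "")))
        (fun _ => False) c d := by
  obtain ⟨hcore, hedg⟩ := pfF_facts maps
  constructor
  · exact hcore.2.2 c d hc hd
  · exact conn_rootEq maps _ _ (pfF maps) hedg c d hc

-- a free path can be re-run with blocked cells when its component avoids them
theorem reach_unblock {EL bl : Int × Int → Prop} {p : Int × Int}
    (hbl : ∀ z, EL z → Reach EL (fun _ => False) p z → z ≠ p → ¬ bl z) :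
    ∀ c, Reach EL (fun _ => False) p c → c = p ∨ Reach EL bl p c := by
  intro c hr
  induction hr with
  | refl => exact Or.inl rfl
  | step hre hn he hb ih =>
    rename_i e d'
    by_cases hdp : d' = p
    · exact Or.inl hdp
    · right
      have hbl' : ¬ bl d' := hbl d' he (Reach.step hre hn he hb) hdp
      rcases ih with hep | hreb
      · rw [hep] at hn
        exact Reach.step Reach.refl hn he hbl'
      · exact Reach.step hreb hn he hbl'

-- ---------- the eligible cells, in scan order ----------
def eligCells (maps : List String) : List (Int × Int) :=
  (cellsB (maps.length : Int) (PySem.Str.len (PySem.List.pyGetD maps 0 ""))).filter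
    (fun c => decide (chAt maps c.1 c.2 ≠ 'X'))

theorem mem_eligCells (maps : List String) (c : Int × Int) :
    c ∈ eligCells maps ↔
      ELc maps (maps.length : Int) (PySem.Str.len (PySem.List.pyGetD maps 0 "")) c := by
  unfold eligCells ELc
  rw [List.mem_filter, mem_cellsB]
  simp only [decide_eq_true_eq]
  tauto

theorem nodup_eligCells (maps : List String) : (eligCells maps).Nodup :=
  List.Nodup.filter _ (nodup_cellsB _ _)

-- the sum of the digits of one region, named canonically by any of its cells
def compSum (maps : List String) (p : Int × Int) : Int :=
  (((eligCells maps).filter (fun c => decide (rk maps c = rk maps p))).map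
    (fun c => valAt maps c.1 c.2)).sum


-- ---------- A's scan, related to the root classes ----------
def v0 (maps : List String) : List (List Bool) :=
  (PySem.List.pyRange 0 (maps.length : Int)).map
    (fun _ => PySem.List.pyRepeat [false] (PySem.Str.len (PySem.List.pyGetD maps 0 "")))

def stepScan (maps : List String) (st : List (List Bool) × List Int) (c : Int × Int) :
    List (List Bool) × List Int :=
  if mkA st.1 c = false ∧ chAt maps c.1 c.2 ≠ 'X'
  then ((BFS c.1 c.2 maps st.1).1, st.2 ++ [(BFS c.1 c.2 maps st.1).2])
  else st

def stepSeed (maps : List String) (sd : List (Int × Int)) (p : Int × Int) : List (Int × Int) :=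
  if chAt maps p.1 p.2 ≠ 'X'
  then (if rk maps p ∈ sd.map (rk maps) then sd else sd ++ [p])
  else sd

def seedsF (maps : List String) : List (Int × Int) :=
  (cellsB (maps.length : Int) (PySem.Str.len (PySem.List.pyGetD maps 0 ""))).foldl
    (stepSeed maps) []

def ScanRel (maps : List String) (st : List (List Bool) × List Int)
    (sd : List (Int × Int)) : Prop :=
  (∀ c : Int × Int,
    (0 ≤ c.1 ∧ c.1 < (maps.length : Int) ∧ 0 ≤ c.2 ∧
      c.2 < PySem.Str.len (PySem.List.pyGetD maps 0 "")) →
    (mkA st.1 c = true ↔ (chAt maps c.1 c.2 ≠ 'X' ∧ ∃ p ∈ sd, rk maps c = rk maps p))) ∧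
  st.2 = sd.map (compSum maps) ∧
  (∀ p ∈ sd, ELc maps (maps.length : Int) (PySem.Str.len (PySem.List.pyGetD maps 0 "")) p)

-- one BFS from a fresh eligible seed marks exactly the seed's root class and sums its digits
theorem seed_core (maps : List String) (v : List (List Bool)) (sd : List (Int × Int))
    (p : Int × Int)
    (hm : ∀ c : Int × Int,
      (0 ≤ c.1 ∧ c.1 < (maps.length : Int) ∧ 0 ≤ c.2 ∧
        c.2 < PySem.Str.len (PySem.List.pyGetD maps 0 "")) →
      (mkA v c = true ↔ (chAt maps c.1 c.2 ≠ 'X' ∧ ∃ q ∈ sd, rk maps c = rk maps q)))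
    (hp : ELc maps (maps.length : Int) (PySem.Str.len (PySem.List.pyGetD maps 0 "")) p)
    (hfresh : mkA v p = false) :
    (∀ c : Int × Int,
      (0 ≤ c.1 ∧ c.1 < (maps.length : Int) ∧ 0 ≤ c.2 ∧
        c.2 < PySem.Str.len (PySem.List.pyGetD maps 0 "")) →
      (mkA (BFS p.1 p.2 maps v).1 c = true ↔
        (chAt maps c.1 c.2 ≠ 'X' ∧ ∃ q ∈ sd ++ [p], rk maps c = rk maps q))) ∧
    (BFS p.1 p.2 maps v).2 = compSum maps p := by
  have hBFS : BFS p.1 p.2 maps v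
      = bfsLoop maps (maps.length : Int) (PySem.Str.len (PySem.List.pyGetD maps 0 ""))
        [p] (markA v p) (valAt maps p.1 p.2) := rfl
  have hmark : ∀ e : Int × Int, 0 ≤ e.1 → 0 ≤ e.2 →
      (mkA (markA v p) e = true ↔ (mkA v e = true ∨ e = p)) :=
    fun e he1 he2 => mkA_markA v p e hfresh hp.1 hp.2.2.1 he1 he2
  obtain ⟨N, hndN, hmemN, hmkN, hvolN⟩ := bfsLoop_spec maps (maps.length : Int)
    (PySem.Str.len (PySem.List.pyGetD maps 0 "")) [p] (markA v p) (valAt maps p.1 p.2)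
    (by
      intro c hc
      rw [List.mem_singleton] at hc
      subst hc
      exact ⟨(hmark c hp.1 hp.2.2.1).2 (Or.inr rfl), hp.1, hp.2.2.1⟩)
    (by simp)
  have hcompfree : ∀ z, ELc maps (maps.length : Int)
      (PySem.Str.len (PySem.List.pyGetD maps 0 "")) z →
      Reach (ELc maps (maps.length : Int) (PySem.Str.len (PySem.List.pyGetD maps 0 "")))
        (fun _ => False) p z → z ≠ p → ¬ (mkA (markA v p) z = true) := by
    intro z hz hrz hzp hmz
    rcases (hmark z hz.1 hz.2.2.1).1 hmz with hv | hzp'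
    · obtain ⟨hch, q, hq, hrkzq⟩ := (hm z (ELc_inB hz)).1 hv
      have hrkpz : rk maps p = rk maps z := (rk_bridge maps p z hp hz).2 hrz
      have hpm : mkA v p = true :=
        (hm p (ELc_inB hp)).2 ⟨hp.2.2.2.2, q, hq, by rw [hrkpz]; exact hrkzq⟩
      rw [hfresh] at hpm
      exact absurd hpm (by simp)
    · exact hzp hzp'
  have hPN : ∀ c : Int × Int, (c ∈ (p :: N)) ↔
      (ELc maps (maps.length : Int) (PySem.Str.len (PySem.List.pyGetD maps 0 "")) c ∧
        rk maps c = rk maps p) := by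
    intro c
    constructor
    · intro hc
      rcases List.mem_cons.1 hc with rfl | hcN
      · exact ⟨hp, rfl⟩
      · obtain ⟨hnm, a, ha, hr⟩ := (hmemN c).1 hcN
        rw [List.mem_singleton] at ha
        rw [ha] at hr
        have hfree : Reach (ELc maps (maps.length : Int)
            (PySem.Str.len (PySem.List.pyGetD maps 0 ""))) (fun _ => False) p c :=
          Reach_anti (fun x hx => hx.elim) hr
        have hcel : ELc maps (maps.length : Int)
            (PySem.Str.len (PySem.List.pyGetD maps 0 "")) c := by
          rcases Reach_elig hr with heq | ⟨h1, _⟩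
          · rw [heq]; exact hp
          · exact h1
        exact ⟨hcel, ((rk_bridge maps p c hp hcel).2 hfree).symm⟩
    · rintro ⟨hcel, hrk⟩
      by_cases hcp : c = p
      · rw [hcp]; exact List.mem_cons_self
      · have hfree : Reach (ELc maps (maps.length : Int)
            (PySem.Str.len (PySem.List.pyGetD maps 0 ""))) (fun _ => False) p c :=
          (rk_bridge maps p c hp hcel).1 hrk.symm
        rcases reach_unblock (bl := fun x => mkA (markA v p) x = true) hcompfree c hfree with
          hcp2 | hrb
        · exact absurd hcp2 hcp
        · apply List.mem_cons_of_mem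
          apply (hmemN c).2
          exact ⟨hcompfree c hcel hfree hcp, p, List.mem_singleton.2 rfl, hrb⟩
  constructor
  · intro c hcInB
    rw [hBFS, hmkN c hcInB.1 hcInB.2.2.1]
    constructor
    · rintro (hmm | hcN)
      · rcases (hmark c hcInB.1 hcInB.2.2.1).1 hmm with hv | heq
        · obtain ⟨hch, q, hq, hrk⟩ := (hm c hcInB).1 hv
          exact ⟨hch, q, List.mem_append.2 (Or.inl hq), hrk⟩
        · rw [heq]
          exact ⟨hp.2.2.2.2, p, List.mem_append.2 (Or.inr (List.mem_singleton.2 rfl)), rfl⟩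
      · obtain ⟨hcel, hrk⟩ := (hPN c).1 (List.mem_cons_of_mem _ hcN)
        exact ⟨hcel.2.2.2.2, p, List.mem_append.2 (Or.inr (List.mem_singleton.2 rfl)), hrk⟩
    · rintro ⟨hch, q, hq, hrk⟩
      rcases List.mem_append.1 hq with hql | hqr
      · exact Or.inl ((hmark c hcInB.1 hcInB.2.2.1).2
          (Or.inl ((hm c hcInB).2 ⟨hch, q, hql, hrk⟩)))
      · rw [List.mem_singleton] at hqr
        subst hqr
        have hcel : ELc maps (maps.length : Int)
            (PySem.Str.len (PySem.List.pyGetD maps 0 "")) c :=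
          ⟨hcInB.1, hcInB.2.1, hcInB.2.2.1, hcInB.2.2.2, hch⟩
        rcases List.mem_cons.1 ((hPN c).2 ⟨hcel, hrk⟩) with heq | hcN
        · exact Or.inl ((hmark c hcInB.1 hcInB.2.2.1).2 (Or.inr heq))
        · exact Or.inr hcN
  · have hndPN : (p :: N).Nodup := by
      rw [List.nodup_cons]
      refine ⟨?_, hndN⟩
      intro hpN
      exact ((hmemN p).1 hpN).1 ((hmark p hp.1 hp.2.2.1).2 (Or.inr rfl))
    have hmemEq : ∀ x, x ∈ (p :: N) ↔
        x ∈ (eligCells maps).filter (fun c => decide (rk maps c = rk maps p)) := by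
      intro x
      rw [hPN x, List.mem_filter, mem_eligCells]
      simp only [decide_eq_true_eq]
    have hsum := sum_eq_of_nodup_mem (fun c => valAt maps c.1 c.2) (p :: N)
      ((eligCells maps).filter (fun c => decide (rk maps c = rk maps p)))
      hndPN (List.Nodup.filter _ (nodup_eligCells maps)) hmemEq
    rw [hBFS, hvolN]
    unfold compSum
    rw [← hsum]
    simp only [List.map_cons, List.sum_cons]

theorem scan_step (maps : List String) (c : Int × Int)
    (hcInB : 0 ≤ c.1 ∧ c.1 < (maps.length : Int) ∧ 0 ≤ c.2 ∧
      c.2 < PySem.Str.len (PySem.List.pyGetD maps 0 ""))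
    (st : List (List Bool) × List Int) (sd : List (Int × Int))
    (hR : ScanRel maps st sd) : ScanRel maps (stepScan maps st c) (stepSeed maps sd c) := by
  obtain ⟨hm, ha, hsd⟩ := hR
  unfold stepScan stepSeed
  by_cases hch : chAt maps c.1 c.2 ≠ 'X'
  · by_cases hmk : mkA st.1 c = false
    · have hfresh' : ¬ rk maps c ∈ sd.map (rk maps) := by
        intro hmem
        rw [List.mem_map] at hmem
        obtain ⟨q, hq, hrkq⟩ := hmem
        have hmm : mkA st.1 c = true := (hm c hcInB).2 ⟨hch, q, hq, hrkq.symm⟩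
        rw [hmk] at hmm
        exact absurd hmm (by simp)
      rw [if_pos ⟨hmk, hch⟩, if_pos hch, if_neg hfresh']
      have hcel : ELc maps (maps.length : Int)
          (PySem.Str.len (PySem.List.pyGetD maps 0 "")) c :=
        ⟨hcInB.1, hcInB.2.1, hcInB.2.2.1, hcInB.2.2.2, hch⟩
      obtain ⟨hm', hvol⟩ := seed_core maps st.1 sd c hm hcel hmk
      refine ⟨hm', ?_, ?_⟩
      · show st.2 ++ [(BFS c.1 c.2 maps st.1).2] = (sd ++ [c]).map (compSum maps)
        rw [ha, hvol, List.map_append]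
        rfl
      · intro q hq
        rcases List.mem_append.1 hq with hql | hqr
        · exact hsd q hql
        · rw [List.mem_singleton] at hqr
          rw [hqr]
          exact hcel
    · have hmk' : mkA st.1 c = true := by
        cases hh : mkA st.1 c
        · exact absurd hh hmk
        · rfl
      have hmem : rk maps c ∈ sd.map (rk maps) := by
        obtain ⟨hch2, q, hq, hrk⟩ := (hm c hcInB).1 hmk'
        exact List.mem_map.2 ⟨q, hq, hrk.symm⟩
      rw [if_neg (fun hh => hmk hh.1), if_pos hch, if_pos hmem]
      exact ⟨hm, ha, hsd⟩
  · rw [if_neg (fun hh => hch hh.2), if_neg hch]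
    exact ⟨hm, ha, hsd⟩

theorem scan_base (maps : List String) : ScanRel maps (v0 maps, []) [] := by
  refine ⟨?_, rfl, by simp⟩
  intro c hcInB
  show mkA (v0 maps) c = true ↔ _
  unfold v0
  rw [mk_init maps c hcInB]
  simp

theorem scan_total (maps : List String) :
    ((cellsB (maps.length : Int) (PySem.Str.len (PySem.List.pyGetD maps 0 ""))).foldl
      (stepScan maps) (v0 maps, [])).2 = (seedsF maps).map (compSum maps) := by
  have hrel := foldl_rel (ScanRel maps) (stepScan maps) (stepSeed maps)
    (cellsB (maps.length : Int) (PySem.Str.len (PySem.List.pyGetD maps 0 "")))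
    (v0 maps, []) [] (scan_base maps)
    (fun x hx s t hR => scan_step maps x ((mem_cellsB _ _ x).1 hx) s t hR)
  exact hrel.2.1

-- ---------- B's grouping dict ----------
def stepD (maps : List String) (par : List Int) (d : PySem.Dict Int Int) (c : Int × Int) :
    PySem.Dict Int Int :=
  if chAt maps c.1 c.2 ≠ 'X'
  then d.insert (RootOf par (c.1 * PySem.Str.len (PySem.List.pyGetD maps 0 "") + c.2))
    (d.getD (RootOf par (c.1 * PySem.Str.len (PySem.List.pyGetD maps 0 "") + c.2)) 0
      + valAt maps c.1 c.2)
  else d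

def sumsD (maps : List String) : PySem.Dict Int Int :=
  (cellsB (maps.length : Int) (PySem.Str.len (PySem.List.pyGetD maps 0 ""))).foldl
    (stepD maps (pfF maps)) PySem.Dict.empty

theorem foldl_filter_decide {α β : Type} (P : α → Prop) [DecidablePred P] (f : β → α → β) :
    ∀ (l : List α) (init : β),
      (l.filter (fun a => decide (P a))).foldl f init
        = l.foldl (fun s a => if P a then f s a else s) init := by
  intro l
  induction l with
  | nil => intro init; rfl
  | cons a t ih =>
    intro init
    by_cases h : P a
    · rw [List.filter_cons, if_pos (by simpa using h), List.foldl_cons, List.foldl_cons,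
        if_pos h]
      exact ih _
    · rw [List.filter_cons, if_neg (by simpa using h), List.foldl_cons, if_neg h]
      exact ih _

theorem getD_foldl_insert_sum (key : (Int × Int) → Int) (g : (Int × Int) → Int) :
    ∀ (L : List (Int × Int)) (d : PySem.Dict Int Int) (r : Int),
      (L.foldl (fun d a => d.insert (key a) (d.getD (key a) 0 + g a)) d).getD r 0
        = d.getD r 0 + ((L.filter (fun a => decide (key a = r))).map g).sum := by
  intro L
  induction L with
  | nil => intro d r; simp
  | cons a t ih =>
    intro d r
    rw [List.foldl_cons, ih]
    by_cases h : key a = r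
    · rw [List.filter_cons, if_pos (by simpa using h), PySem.Dict.getD_insert,
        if_pos h.symm, h]
      simp only [List.map_cons, List.sum_cons]
      ring
    · rw [List.filter_cons, if_neg (by simpa using h), PySem.Dict.getD_insert,
        if_neg (fun hh => h hh.symm)]

theorem seeds_map_rk (maps : List String) :
    ∀ (L : List (Int × Int)) (sd : List (Int × Int)),
      ((L.foldl (fun sd p => if rk maps p ∈ sd.map (rk maps) then sd else sd ++ [p]) sd).map
        (rk maps))
        = L.foldl (fun s p => PySem.Set.add s (rk maps p)) (sd.map (rk maps)) := by
  intro L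
  induction L with
  | nil => intro sd; rfl
  | cons a t ih =>
    intro sd
    rw [List.foldl_cons, List.foldl_cons]
    by_cases h : rk maps a ∈ sd.map (rk maps)
    · rw [if_pos h, PySem.Set.add_of_mem h]
      exact ih sd
    · rw [if_neg h, PySem.Set.add_of_not_mem h, ih (sd ++ [a])]
      have hmm : (sd ++ [a]).map (rk maps) = sd.map (rk maps) ++ [rk maps a] := by simp
      rw [hmm]

theorem valsD (maps : List String) :
    (sumsD maps).values = (seedsF maps).map (compSum maps) := by
  have h1 : (eligCells maps).foldl
      (fun d c => d.insert (rk maps c) (d.getD (rk maps c) 0 + valAt maps c.1 c.2))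
      PySem.Dict.empty = sumsD maps := by
    unfold sumsD eligCells
    exact foldl_filter_decide _ _ _ _
  have hkeys : (sumsD maps).keys = PySem.Set.ofList ((eligCells maps).map (rk maps)) := by
    rw [← h1, PySem.Dict.keys_foldl_insert_key (eligCells maps) (rk maps)
      (fun d c => d.getD (rk maps c) 0 + valAt maps c.1 c.2) PySem.Dict.empty,
      PySem.Dict.keys_empty, PySem.Set.update_nil_left]
  have hnodup : (sumsD maps).keys.Nodup := by
    rw [← h1]
    exact PySem.Dict.nodup_keys_foldl_insert_key _ _ _ _ PySem.Dict.nodup_keys_empty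
  have hgetD : ∀ r : Int, (sumsD maps).getD r 0
      = (((eligCells maps).filter (fun c => decide (rk maps c = r))).map
          (fun c => valAt maps c.1 c.2)).sum := by
    intro r
    rw [← h1, getD_foldl_insert_sum (rk maps) (fun c => valAt maps c.1 c.2)
      (eligCells maps) PySem.Dict.empty r]
    simp
  have hseeds : seedsF maps = (eligCells maps).foldl
      (fun sd p => if rk maps p ∈ sd.map (rk maps) then sd else sd ++ [p]) [] := by
    unfold seedsF eligCells stepSeed
    rw [foldl_filter_decide]
  have hofmap : PySem.Set.ofList ((eligCells maps).map (rk maps))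
      = (seedsF maps).map (rk maps) := by
    rw [hseeds, seeds_map_rk maps (eligCells maps) [], ← PySem.Set.update_nil_left,
      PySem.Set.update_map_eq_foldl_add]
    rfl
  rw [PySem.Dict.values_eq_map_keys _ hnodup 0, hkeys, hofmap, List.map_map]
  apply List.map_congr_left
  intro p _
  show (sumsD maps).getD (rk maps p) 0 = compSum maps p
  rw [hgetD (rk maps p)]
  rfl

-- ---------- unfolding the two ports into the cell folds ----------
theorem solution_unfold (maps : List String) :
    solution maps =
      (if ((cellsB (maps.length : Int) (PySem.Str.len (PySem.List.pyGetD maps 0 ""))).foldl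
            (stepScan maps) (v0 maps, [])).2 ≠ []
       then PySem.List.sorted
         ((cellsB (maps.length : Int) (PySem.Str.len (PySem.List.pyGetD maps 0 ""))).foldl
            (stepScan maps) (v0 maps, [])).2 (fun x => x)
       else [-1]) := by
  have h1 : solution maps =
      (if ((PySem.List.pyRange 0 (maps.length : Int)).foldl
            (fun (st : List (List Bool) × List Int) i =>
              (PySem.List.pyRange 0 (PySem.Str.len (PySem.List.pyGetD maps 0 ""))).foldl
                (fun st j => stepScan maps st (i, j)) st) (v0 maps, [])).2 ≠ []
       then PySem.List.sorted
         ((PySem.List.pyRange 0 (maps.length : Int)).foldl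
            (fun (st : List (List Bool) × List Int) i =>
              (PySem.List.pyRange 0 (PySem.Str.len (PySem.List.pyGetD maps 0 ""))).foldl
                (fun st j => stepScan maps st (i, j)) st) (v0 maps, [])).2 (fun x => x)
       else [-1]) := rfl
  rw [h1, fold_nested_eq]

theorem solution_alt_unfold (maps : List String) :
    solution_alt maps =
      (if (sumsD maps).values ≠ []
       then PySem.List.sorted (sumsD maps).values (fun x => x)
       else [-1]) := by
  have h1 : solution_alt maps =
      (if ((PySem.List.pyRange 0 (maps.length : Int)).foldl
            (fun (d : PySem.Dict Int Int) i =>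
              (PySem.List.pyRange 0 (PySem.Str.len (PySem.List.pyGetD maps 0 ""))).foldl
                (fun d j => stepD maps
                  ((PySem.List.pyRange 0 (maps.length : Int)).foldl
                    (fun (par : List Int) i' =>
                      (PySem.List.pyRange 0
                        (PySem.Str.len (PySem.List.pyGetD maps 0 ""))).foldl
                        (fun par j' => stepU maps (maps.length : Int)
                          (PySem.Str.len (PySem.List.pyGetD maps 0 "")) par (i', j')) par)
                    (PySem.List.pyRange 0 ((maps.length : Int)
                      * PySem.Str.len (PySem.List.pyGetD maps 0 ""))))
                  d (i, j)) d) PySem.Dict.empty).values ≠ []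
       then PySem.List.sorted
         ((PySem.List.pyRange 0 (maps.length : Int)).foldl
            (fun (d : PySem.Dict Int Int) i =>
              (PySem.List.pyRange 0 (PySem.Str.len (PySem.List.pyGetD maps 0 ""))).foldl
                (fun d j => stepD maps
                  ((PySem.List.pyRange 0 (maps.length : Int)).foldl
                    (fun (par : List Int) i' =>
                      (PySem.List.pyRange 0
                        (PySem.Str.len (PySem.List.pyGetD maps 0 ""))).foldl
                        (fun par j' => stepU maps (maps.length : Int)
                          (PySem.Str.len (PySem.List.pyGetD maps 0 "")) par (i', j')) par)
                    (PySem.List.pyRange 0 ((maps.length : Int)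
                      * PySem.Str.len (PySem.List.pyGetD maps 0 ""))))
                  d (i, j)) d) PySem.Dict.empty).values (fun x => x)
       else [-1]) := rfl
  rw [h1, fold_nested_eq (maps.length : Int) (PySem.Str.len (PySem.List.pyGetD maps 0 ""))
    (stepU maps (maps.length : Int) (PySem.Str.len (PySem.List.pyGetD maps 0 ""))),
    fold_nested_eq]
  rfl

theorem solution_eq_alt : ∀ (maps : List String), solution maps = solution_alt maps := by
  intro maps
  rw [solution_unfold maps, solution_alt_unfold maps, scan_total maps, valsD maps]

-- ===== VERDICT (by name: the statement is the Claim_ definition above) =====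
theorem solution_spec : Claim_equal_solution := by
  intro maps _ _
  unfold Spec_solution
  exact solution_eq_alt maps
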